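-- pv_equiv track=rewrite | github.com/artisan1218/LeetCode-Solution | solutions/dungeonGame/dungeonGame.py | calculateMinimumHPDP
-- ===== SOURCE A (Python) =====
-- from typing import List
--
-- def calculateMinimumHPDP(dungeon: List[List[int]]) -> int:
--     # dp[x][y] = minimum HP needed at this cell to get to princess
--     # we trace back from princess to starting point
--     dp = [[0 for i in range(len(dungeon[0]))] for i in range(len(dungeon))]
--     dp[-1][-1] = max(1 - dungeon[-1][-1], 1)
--
--     # since we can only go rightward or downward, when tracing back, we can only go leftward or upward
--     # fill in last row from right to left
--     for y in range(len(dungeon[-1])-2, -1, -1):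
--         dp[-1][y] = max(dp[-1][y+1] - dungeon[-1][y], 1)
--
--     # fill in last column from bottom to top
--     for x in range(len(dungeon)-2, -1, -1):
--         dp[x][-1] = max(dp[x+1][-1] - dungeon[x][-1], 1)
--
--     # dp
--     for x in range(len(dungeon)-2, -1, -1):
--         for y in range(len(dungeon[x])-2, -1, -1):
--             right = max(dp[x][y+1] - dungeon[x][y], 1)
--             down = max(dp[x+1][y] - dungeon[x][y], 1)
--             dp[x][y] = min(right, down)
--
--     return dp[0][0]
-- ===== SOURCE B (Python) =====
-- from typing import List
--
-- def calculateMinimumHPDP(dungeon: List[List[int]]) -> int: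
--     # Binary search the starting HP; each candidate is checked by a forward
--     # max-health sweep (None = cell unreachable alive).
--     n = len(dungeon[0])
--
--     def feasible(hp):
--         cur = [None] * n
--         first = True
--         for row in dungeon:
--             left = hp if first else None
--             first = False
--             nxt = []
--             for d, up in zip(row, cur):
--                 cand = up if left is None else (left if up is None else max(left, up))
--                 left = cand + d if cand is not None and cand + d >= 1 else None
--                 nxt.append(left)
--             cur = nxt
--         return cur[-1] is not None
--
--     lo = 1
--     hi = 1 + sum(-d for row in dungeon for d in row if d < 0)
--     while lo < hi:
--         mid = (lo + hi) // 2
--         if feasible(mid):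
--             hi = mid
--         else:
--             lo = mid + 1
--     return lo
-- ===== Notes on version B (the rewrite author's own statement) =====
-- stated objective: alternative
-- what changed: Replaces the backward min-need DP table entirely: B binary-searches the starting HP between 1 and 1+sum of damages, deciding each candidate with a forward maximum-health reachability sweep (None = dead), instead of computing per-cell requirements backward.
-- outside the precondition, e.g. on calculateMinimumHPDP([[-6, -6, -7], [1]]): A returns 6, B returns 7; on calculateMinimumHPDP([[], [1]]): A raises IndexError, B returns 1
import Mathlib
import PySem

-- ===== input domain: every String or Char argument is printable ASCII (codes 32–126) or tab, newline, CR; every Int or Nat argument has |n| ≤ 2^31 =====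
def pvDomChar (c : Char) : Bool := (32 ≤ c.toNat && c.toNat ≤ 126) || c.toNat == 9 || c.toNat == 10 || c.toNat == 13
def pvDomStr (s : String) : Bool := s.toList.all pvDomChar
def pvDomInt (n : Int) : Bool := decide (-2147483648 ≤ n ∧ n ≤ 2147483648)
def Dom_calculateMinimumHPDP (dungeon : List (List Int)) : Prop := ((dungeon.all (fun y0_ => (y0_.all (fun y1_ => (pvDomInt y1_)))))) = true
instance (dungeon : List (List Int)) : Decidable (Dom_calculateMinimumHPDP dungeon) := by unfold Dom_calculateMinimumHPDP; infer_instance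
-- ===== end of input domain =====

-- B abandons A's backward min-need DP table: it binary-searches the starting HP, deciding each
-- candidate by a forward maximum-health reachability sweep (objective: alternative algorithm).

-- ===== PORT A =====
-- helpers for Python's dp[x][y] reads/writes (negative indices included)
def ggetRow (dp : List (List Int)) (x : Int) : List Int := PySem.List.pyGetD dp x []
def gget (dp : List (List Int)) (x y : Int) : Int := PySem.List.pyGetD (ggetRow dp x) y 0
def gset (dp : List (List Int)) (x y : Int) (v : Int) : List (List Int) :=
  PySem.List.pySetD dp x (PySem.List.pySetD (ggetRow dp x) y v)

def calculateMinimumHPDP (dungeon : List (List Int)) : Int :=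
  -- dp = [[0 for i in range(len(dungeon[0]))] for i in range(len(dungeon))]
  let dp0 : List (List Int) :=
    (PySem.List.pyRange 0 (dungeon.length : Int) 1).map
      (fun _ => (PySem.List.pyRange 0 ((ggetRow dungeon 0).length : Int) 1).map (fun _ => (0 : Int)))
  -- dp[-1][-1] = max(1 - dungeon[-1][-1], 1)
  let dp1 := gset dp0 (-1) (-1) (max (1 - gget dungeon (-1) (-1)) 1)
  -- last row, right to left
  let dp2 := (PySem.List.pyRange (((ggetRow dungeon (-1)).length : Int) - 2) (-1) (-1)).foldl
      (fun dp y => gset dp (-1) y (max (gget dp (-1) (y + 1) - gget dungeon (-1) y) 1)) dp1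
  -- last column, bottom to top
  let dp3 := (PySem.List.pyRange ((dungeon.length : Int) - 2) (-1) (-1)).foldl
      (fun dp x => gset dp x (-1) (max (gget dp (x + 1) (-1) - gget dungeon x (-1)) 1)) dp2
  -- main dp loops
  let dp4 := (PySem.List.pyRange ((dungeon.length : Int) - 2) (-1) (-1)).foldl
      (fun dp x =>
        (PySem.List.pyRange (((ggetRow dungeon x).length : Int) - 2) (-1) (-1)).foldl
          (fun dp y =>
            gset dp x y (min (max (gget dp x (y + 1) - gget dungeon x y) 1)
                             (max (gget dp (x + 1) y - gget dungeon x y) 1))) dp) dp3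
  gget dp4 0 0

-- ===== PORT B =====
-- cand = up if left is None else (left if up is None else max(left, up))
def pvCand (left up : Option Int) : Option Int :=
  match left with
  | none => up
  | some l => match up with
    | none => some l
    | some u => some (max l u)

-- left = cand + d if cand is not None and cand + d >= 1 else None
def pvStep (left : Option Int) (du : Int × Option Int) : Option Int :=
  match pvCand left du.2 with
  | some c => if 1 ≤ c + du.1 then some (c + du.1) else none
  | none => none

-- inner loop: 'for d, up in zip(row, cur): …; nxt.append(left)'
def pvRowLoop (row : List Int) (cur : List (Option Int)) (left0 : Option Int) : List (Option Int) :=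
  ((row.zip cur).foldl
    (fun (st : List (Option Int) × Option Int) du =>
      let l := pvStep st.2 du
      (st.1 ++ [l], l)) (([] : List (Option Int)), left0)).1

-- outer loop of feasible: 'for row in dungeon' carrying (cur, first)
def pvFwd (dungeon : List (List Int)) (hp : Int) (n : Nat) : List (Option Int) :=
  (dungeon.foldl
    (fun (st : List (Option Int) × Bool) row =>
      (pvRowLoop row st.1 (if st.2 then some hp else none), false))
    (List.replicate n (none : Option Int), true)).1

-- return cur[-1] is not None
def pvFeasible (dungeon : List (List Int)) (hp : Int) : Bool :=
  (PySem.List.pyGetD (pvFwd dungeon hp (PySem.List.pyGetD dungeon 0 []).length) (-1) none).isSome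

-- hi = 1 + sum(-d for row in dungeon for d in row if d < 0)
def pvHi (dungeon : List (List Int)) : Int :=
  1 + dungeon.foldl (fun s row => row.foldl (fun s d => if d < 0 then s + (-d) else s) s) 0

-- while lo < hi: mid = (lo + hi) // 2; …  (the interval width as structural fuel: the loop
-- halves the width each turn, so width many steps always suffice)
def pvBSGo (dungeon : List (List Int)) : Nat → Int → Int → Int
  | 0, lo, _ => lo
  | fuel + 1, lo, hi =>
    if lo < hi then
      if pvFeasible dungeon (PySem.Int.floordiv (lo + hi) 2) then
        pvBSGo dungeon fuel lo (PySem.Int.floordiv (lo + hi) 2)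
      else
        pvBSGo dungeon fuel (PySem.Int.floordiv (lo + hi) 2 + 1) hi
    else lo

def pvBS (dungeon : List (List Int)) (lo hi : Int) : Int :=
  pvBSGo dungeon (hi - lo).toNat lo hi

def calculateMinimumHPDP_alt (dungeon : List (List Int)) : Int :=
  pvBS dungeon 1 (pvHi dungeon)

-- ===== PRECONDITION & SPEC =====
-- Pre_ restricts to the task's natural domain: a nonempty rectangular grid with nonempty rows; on
-- empty or ragged grids A either raises IndexError or returns accidental values read from
-- unfilled zero entries of its dp table (B's zip silently truncates instead).
def Pre_calculateMinimumHPDP (dungeon : List (List Int)) : Prop :=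
  dungeon ≠ [] ∧ dungeon.headD [] ≠ [] ∧ ∀ r ∈ dungeon, r.length = (dungeon.headD []).length

instance (dungeon : List (List Int)) : Decidable (Pre_calculateMinimumHPDP dungeon) := by
  unfold Pre_calculateMinimumHPDP; infer_instance

def pvWitness_calculateMinimumHPDP : List (List Int) := [[-3, 5], [1, -4]]

def Spec_calculateMinimumHPDP (dungeon : List (List Int)) (out : Int) : Prop :=
  out = calculateMinimumHPDP_alt dungeon
instance (dungeon : List (List Int)) (out : Int) : Decidable (Spec_calculateMinimumHPDP dungeon out) := by
  unfold Spec_calculateMinimumHPDP; infer_instance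

-- ===== CLAIM (what is proved, stated in full; the proofs are below) =====
def Claim_equal_calculateMinimumHPDP : Prop :=
  ∀ (dungeon : List (List Int)), Dom_calculateMinimumHPDP dungeon →
    Pre_calculateMinimumHPDP dungeon →
    Spec_calculateMinimumHPDP dungeon (calculateMinimumHPDP dungeon)

-- ===== LEMMAS AND PROOFS =====

-- ---- the backward per-cell requirement ('need'), proof-side characterisation of A ----
-- last row: need = max((right need or 1) - d, 1)
def bLastRow : List Int → List Int
  | [] => []
  | [a] => [max (1 - a) 1]
  | a :: b :: rest =>
    let r := bLastRow (b :: rest)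
    max (r.headD 1 - a) 1 :: r

-- a non-last row given the needs of the row below
def bRowStep : List Int → List Int → List Int
  | [a], b :: _ => [max (b - a) 1]
  | a :: rest, b :: brest =>
    let r := bRowStep rest brest
    max (min (r.headD 1) b - a) 1 :: r
  | _, _ => []

def bGo : List (List Int) → List Int
  | [] => []
  | [r] => bLastRow r
  | r :: r2 :: rest => bRowStep r (bGo (r2 :: rest))

-- elementary List.getD facts
theorem pvGetD_set_self {α : Type} : ∀ (l : List α) (i : Nat) (v d : α), i < l.length →
    (l.set i v).getD i d = v := by
  intro l
  induction l with
  | nil => intro i v d h; simp at h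
  | cons a t ih =>
    intro i v d h
    cases i with
    | zero => simp [List.getD]
    | succ j => simpa [List.getD] using ih j v d (by simpa using h)

theorem pvGetD_set_ne {α : Type} : ∀ (l : List α) (i j : Nat) (v : α) (d : α), i ≠ j →
    (l.set i v).getD j d = l.getD j d := by
  intro l
  induction l with
  | nil => intro i j v d _; simp
  | cons a t ih =>
    intro i j v d h
    cases i with
    | zero => cases j with
      | zero => exact absurd rfl h
      | succ j' => simp [List.getD]
    | succ i' => cases j with
      | zero => simp [List.getD]
      | succ j' => simpa [List.getD] using ih i' j' v d (by omega)

theorem pvGetD_replicate {α : Type} : ∀ (n k : Nat) (a d : α), k < n →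
    (List.replicate n a).getD k d = a := by
  intro n
  induction n with
  | zero => intro k a d h; omega
  | succ n ih =>
    intro k a d h
    cases k with
    | zero => simp [List.getD]
    | succ j => simpa [List.getD, List.replicate] using ih j a d (by omega)

theorem pvSet_getD_self {α : Type} (l : List α) (i : Nat) (d : α) (h : i < l.length) :
    l.set i (l.getD i d) = l := by
  apply List.ext_getElem (by simp)
  intro k h1 h2
  rcases eq_or_ne i k with rfl | hne
  · rw [List.getElem_set_self, List.getD_eq_getElem l d h]
  · rw [List.getElem_set_ne hne]

theorem pvHeadD_eq_getD {α : Type} (l : List α) (d d' : α) (h : l ≠ []) :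
    l.headD d = l.getD 0 d' := by
  cases l with
  | nil => exact absurd rfl h
  | cons a t => simp [List.getD]

theorem pvHead?_getD {α : Type} (l : List α) (d d' : α) (h : l ≠ []) :
    l.head?.getD d = l[0]?.getD d' := by
  cases l with
  | nil => exact absurd rfl h
  | cons a t => simp

theorem pvDrop_eq_getD_cons {α : Type} (l : List α) (k : Nat) (d : α) (h : k < l.length) :
    l.drop k = l.getD k d :: l.drop (k + 1) := by
  rw [List.getD_eq_getElem l d h]
  exact List.drop_eq_getElem_cons h

-- negative-index forms of pySetD / pyGetD
theorem pvPySetD_neg_one {α : Type} (xs : List α) (v : α) (h : xs ≠ []) :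
    PySem.List.pySetD xs (-1) v = xs.set (xs.length - 1) v := by
  have hlen : 0 < xs.length := List.length_pos_iff.mpr h
  unfold PySem.List.pySetD PySem.List.pySet? PySem.List.pyIdx?
  rw [if_neg (by norm_num), if_pos (by omega)]
  simp

theorem pvPyGetD_neg_one {α : Type} (xs : List α) (d : α) (h : xs ≠ []) :
    PySem.List.pyGetD xs (-1) d = xs.getD (xs.length - 1) d := by
  have hlen : 0 < xs.length := List.length_pos_iff.mpr h
  unfold PySem.List.pyGetD PySem.List.pyGet? PySem.List.pyIdx?
  rw [if_neg (by norm_num), if_pos (by omega)]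
  simp [List.getD_eq_getElem?_getD]

-- min/max arithmetic identity used by the dp recurrence
theorem pvMinMax (p q d : Int) :
    min (max (p - d) 1) (max (q - d) 1) = max (min p q - d) 1 := by
  rcases le_total p q with h | h <;> simp [min_def, max_def] <;> split_ifs <;> omega

-- B-side structure lemmas
theorem bLastRow_length : ∀ r : List Int, (bLastRow r).length = r.length := by
  intro r
  induction r with
  | nil => simp [bLastRow]
  | cons a t ih =>
    cases t with
    | nil => simp [bLastRow]
    | cons b rest => simpa [bLastRow] using ih

theorem bLastRow_ne_nil (r : List Int) (h : r ≠ []) : bLastRow r ≠ [] := by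
  cases r with
  | nil => exact absurd rfl h
  | cons a t => cases t <;> simp [bLastRow]

theorem bRowStep_length : ∀ (r b : List Int), r.length = b.length →
    (bRowStep r b).length = r.length := by
  intro r
  induction r with
  | nil => intro b h; cases b with
    | nil => simp [bRowStep]
    | cons b0 bs => simp at h
  | cons a t ih =>
    intro b h
    cases b with
    | nil => simp at h
    | cons b0 bs =>
      cases t with
      | nil => simp [bRowStep]
      | cons c rest => simpa [bRowStep] using ih bs (by simpa using h)

theorem bRowStep_ne_nil (r b : List Int) (hr : r ≠ []) (hb : b ≠ []) : bRowStep r b ≠ [] := by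
  cases r with
  | nil => exact absurd rfl hr
  | cons a t =>
    cases b with
    | nil => exact absurd rfl hb
    | cons b0 bs => cases t <;> simp [bRowStep]

theorem bLastRow_getD_last : ∀ r : List Int, r ≠ [] →
    (bLastRow r).getD (r.length - 1) 0 = max (1 - r.getD (r.length - 1) 0) 1 := by
  intro r
  induction r with
  | nil => intro h; exact absurd rfl h
  | cons a t ih =>
    intro _
    cases t with
    | nil => simp [bLastRow, List.getD]
    | cons b rest =>
      have := ih (by simp)
      simpa [bLastRow, List.getD_cons_succ] using this

theorem bLastRow_getD : ∀ (r : List Int) (k : Nat), k + 1 < r.length →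
    (bLastRow r).getD k 0 = max ((bLastRow r).getD (k + 1) 0 - r.getD k 0) 1 := by
  intro r
  induction r with
  | nil => intro k h; simp at h
  | cons a t ih =>
    intro k h
    cases t with
    | nil => simp at h
    | cons b rest =>
      cases k with
      | zero =>
        simp [bLastRow, List.getD_cons_succ, List.getD_cons_zero,
          pvHead?_getD (bLastRow (b :: rest)) 1 0 (bLastRow_ne_nil _ (by simp))]
      | succ k' =>
        have := ih k' (by simpa using h)
        simpa [bLastRow, List.getD_cons_succ] using this

theorem bRowStep_getD_last : ∀ (r b : List Int), r.length = b.length → r ≠ [] →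
    (bRowStep r b).getD (r.length - 1) 0
      = max (b.getD (r.length - 1) 0 - r.getD (r.length - 1) 0) 1 := by
  intro r
  induction r with
  | nil => intro b _ h; exact absurd rfl h
  | cons a t ih =>
    intro b hl _
    cases b with
    | nil => simp at hl
    | cons b0 bs =>
      cases t with
      | nil =>
        have : bs = [] := by simpa using hl
        subst this
        simp [bRowStep, List.getD]
      | cons c rest =>
        have hbs : bs ≠ [] := by
          cases bs with
          | nil => simp at hl
          | cons _ _ => simp
        have := ih bs (by simpa using hl) (by simp)
        simpa [bRowStep, List.getD_cons_succ] using this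

theorem bRowStep_getD : ∀ (r b : List Int) (k : Nat), r.length = b.length → k + 1 < r.length →
    (bRowStep r b).getD k 0
      = max (min ((bRowStep r b).getD (k + 1) 0) (b.getD k 0) - r.getD k 0) 1 := by
  intro r
  induction r with
  | nil => intro b k _ h; simp at h
  | cons a t ih =>
    intro b k hl h
    cases b with
    | nil => simp at hl
    | cons b0 bs =>
      cases t with
      | nil => simp at h
      | cons c rest =>
        have hbs : bs ≠ [] := by
          cases bs with
          | nil => simp at hl
          | cons _ _ => simp
        have hne : bRowStep (c :: rest) bs ≠ [] := by
          cases bs with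
          | nil => simp at hl
          | cons d ds => exact bRowStep_ne_nil _ _ (by simp) (by simp)
        cases k with
        | zero =>
          simp [bRowStep, List.getD_cons_succ, List.getD_cons_zero,
            pvHead?_getD (bRowStep (c :: rest) bs) 1 0 hne]
        | succ k' =>
          have := ih bs k' (by simpa using hl) (by simpa using h)
          simpa [bRowStep, List.getD_cons_succ] using this

-- the value A's last-column pass writes at row k, characterised independently
def lastNeed : List (List Int) → Int
  | [] => 1
  | [r] => max (1 - r.getD (r.length - 1) 0) 1
  | r :: r2 :: rest => max (lastNeed (r2 :: rest) - r.getD (r.length - 1) 0) 1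

-- a row of A's table after the column pass: zeros with the last entry set
def colRowE (n : Nat) (c : Int) : List Int := (List.replicate n (0 : Int)).set (n - 1) c

theorem bGo_length : ∀ (rows : List (List Int)) (n : Nat), rows ≠ [] →
    (∀ r ∈ rows, r.length = n) → (bGo rows).length = n := by
  intro rows
  induction rows with
  | nil => intro n h _; exact absurd rfl h
  | cons r t ih =>
    intro n _ hlen
    cases t with
    | nil => simpa [bGo, bLastRow_length] using hlen r (by simp)
    | cons r2 rest =>
      have h2 : (bGo (r2 :: rest)).length = n := ih n (by simp) (fun r hr => hlen r (by simp [hr]))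
      have h1 : r.length = n := hlen r (by simp)
      rw [show bGo (r :: r2 :: rest) = bRowStep r (bGo (r2 :: rest)) from rfl,
        bRowStep_length r _ (by omega)]
      exact h1

theorem bGo_ne_nil (rows : List (List Int)) (n : Nat) (hn : 0 < n) (hne : rows ≠ [])
    (hlen : ∀ r ∈ rows, r.length = n) : bGo rows ≠ [] := by
  have := bGo_length rows n hne hlen
  intro h
  rw [h] at this
  simp at this
  omega

theorem bGo_last : ∀ (rows : List (List Int)) (n : Nat), 0 < n → rows ≠ [] →
    (∀ r ∈ rows, r.length = n) →
    (bGo rows).getD (n - 1) 0 = lastNeed rows := by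
  intro rows
  induction rows with
  | nil => intro n _ h _; exact absurd rfl h
  | cons r t ih =>
    intro n hn _ hlen
    have h1 : r.length = n := hlen r (by simp)
    cases t with
    | nil =>
      rw [show bGo [r] = bLastRow r from rfl, show lastNeed [r] = max (1 - r.getD (r.length - 1) 0) 1 from rfl, ← h1]
      exact bLastRow_getD_last r (by intro h; rw [h] at h1; simp at h1; omega)
    | cons r2 rest =>
      have h2 : (bGo (r2 :: rest)).length = n := bGo_length _ n (by simp) (fun r hr => hlen r (by simp [hr]))
      have hrne : r ≠ [] := by intro h; rw [h] at h1; simp at h1; omega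
      have := bRowStep_getD_last r (bGo (r2 :: rest)) (by omega) hrne
      rw [show bGo (r :: r2 :: rest) = bRowStep r (bGo (r2 :: rest)) from rfl,
        show lastNeed (r :: r2 :: rest) = max (lastNeed (r2 :: rest) - r.getD (r.length - 1) 0) 1 from rfl, ← h1]
      rw [this, ← ih n hn (by simp) (fun r hr => hlen r (by simp [hr])), h1]

-- row-level fill: A's last-row loop produces bLastRow
theorem rowfill_last (drow : List Int) :
    ∀ (t : Nat) (a : Int), a + 1 = (t : Int) → a < (drow.length : Int) - 1 →
    ∀ cur : List Int, cur.length = drow.length →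
    (∀ k : Nat, a < (k : Int) → k < drow.length → cur.getD k 0 = (bLastRow drow).getD k 0) →
    (PySem.List.pyRange a (-1) (-1)).foldl
      (fun cur y => PySem.List.pySetD cur y
        (max (PySem.List.pyGetD cur (y + 1) 0 - PySem.List.pyGetD drow y 0) 1)) cur
    = bLastRow drow := by
  intro t
  induction t with
  | zero =>
    intro a ha hlt cur hlen hagree
    have ha' : a = -1 := by omega
    rw [ha', PySem.List.pyRange_neg_one_eq_nil (by norm_num)]
    simp only [List.foldl_nil]
    apply List.ext_getElem (by rw [hlen, bLastRow_length])
    intro i h1 h2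
    have := hagree i (by omega) (by rw [← hlen]; exact h1)
    rwa [List.getD_eq_getElem _ 0 h1, List.getD_eq_getElem _ 0 h2] at this
  | succ t ih =>
    intro a ha hlt cur hlen hagree
    have ha' : a = (t : Int) := by omega
    subst ha'
    have htlen : t + 1 < drow.length := by omega
    rw [PySem.List.pyRange_neg_one_cons (by omega)]
    simp only [List.foldl_cons]
    have hv : max (cur.getD (t + 1) 0 - drow.getD t 0) 1 = (bLastRow drow).getD t 0 := by
      rw [hagree (t + 1) (by push_cast; omega) htlen]
      exact (bLastRow_getD drow t htlen).symm
    have hc : ((t : Int) + 1) = ((t + 1 : Nat) : Int) := by push_cast; ring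
    have hf : PySem.List.pySetD cur (t : Int)
        (max (PySem.List.pyGetD cur ((t : Int) + 1) 0 - PySem.List.pyGetD drow (t : Int) 0) 1)
        = cur.set t ((bLastRow drow).getD t 0) := by
      rw [hc]
      simp only [PySem.List.pySetD_natCast, PySem.List.pyGetD_natCast]
      rw [hv]
    rw [hf]
    apply ih ((t : Int) - 1) (by push_cast; ring) (by omega)
    · simp [hlen]
    · intro k hk1 hk2
      rcases eq_or_ne k t with rfl | hne
      · rw [pvGetD_set_self _ _ _ _ (by omega)]
      · have hkt : t < k := by omega
        rw [pvGetD_set_ne _ _ _ _ _ (by omega)]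
        exact hagree k (by exact_mod_cast hkt) hk2

-- row-level fill: A's inner dp loop produces bRowStep
theorem rowfill_dp (drow prev : List Int) (hp : prev.length = drow.length) :
    ∀ (t : Nat) (a : Int), a + 1 = (t : Int) → a < (drow.length : Int) - 1 →
    ∀ cur : List Int, cur.length = drow.length →
    (∀ k : Nat, a < (k : Int) → k < drow.length → cur.getD k 0 = (bRowStep drow prev).getD k 0) →
    (PySem.List.pyRange a (-1) (-1)).foldl
      (fun cur y => PySem.List.pySetD cur y
        (min (max (PySem.List.pyGetD cur (y + 1) 0 - PySem.List.pyGetD drow y 0) 1)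
             (max (PySem.List.pyGetD prev y 0 - PySem.List.pyGetD drow y 0) 1))) cur
    = bRowStep drow prev := by
  intro t
  induction t with
  | zero =>
    intro a ha hlt cur hlen hagree
    have ha' : a = -1 := by omega
    rw [ha', PySem.List.pyRange_neg_one_eq_nil (by norm_num)]
    simp only [List.foldl_nil]
    apply List.ext_getElem (by rw [hlen, bRowStep_length drow prev hp.symm])
    intro i h1 h2
    have := hagree i (by omega) (by rw [← hlen]; exact h1)
    rwa [List.getD_eq_getElem _ 0 h1, List.getD_eq_getElem _ 0 h2] at this
  | succ t ih =>
    intro a ha hlt cur hlen hagree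
    have ha' : a = (t : Int) := by omega
    subst ha'
    have htlen : t + 1 < drow.length := by omega
    rw [PySem.List.pyRange_neg_one_cons (by omega)]
    simp only [List.foldl_cons]
    have hv : min (max (cur.getD (t + 1) 0 - drow.getD t 0) 1)
        (max (prev.getD t 0 - drow.getD t 0) 1) = (bRowStep drow prev).getD t 0 := by
      rw [hagree (t + 1) (by push_cast; omega) htlen, pvMinMax,
        bRowStep_getD drow prev t hp.symm htlen]
    have hc : ((t : Int) + 1) = ((t + 1 : Nat) : Int) := by push_cast; ring
    have hf : PySem.List.pySetD cur (t : Int)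
        (min (max (PySem.List.pyGetD cur ((t : Int) + 1) 0 - PySem.List.pyGetD drow (t : Int) 0) 1)
             (max (PySem.List.pyGetD prev (t : Int) 0 - PySem.List.pyGetD drow (t : Int) 0) 1))
        = cur.set t ((bRowStep drow prev).getD t 0) := by
      rw [hc]
      simp only [PySem.List.pySetD_natCast, PySem.List.pyGetD_natCast]
      rw [hv]
    rw [hf]
    apply ih ((t : Int) - 1) (by push_cast; ring) (by omega)
    · simp [hlen]
    · intro k hk1 hk2
      rcases eq_or_ne k t with rfl | hne
      · rw [pvGetD_set_self _ _ _ _ (by omega)]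
      · have hkt : t < k := by omega
        rw [pvGetD_set_ne _ _ _ _ _ (by omega)]
        exact hagree k (by exact_mod_cast hkt) hk2

-- table-level: the last-row pass only rewrites the last row
theorem last_comm (dungeon : List (List Int)) :
    ∀ (L : List Int) (dp : List (List Int)), dp ≠ [] →
    L.foldl (fun d y => gset d (-1) y (max (gget d (-1) (y + 1) - gget dungeon (-1) y) 1)) dp
    = dp.set (dp.length - 1)
        (L.foldl (fun cur y => PySem.List.pySetD cur y
          (max (PySem.List.pyGetD cur (y + 1) 0 - gget dungeon (-1) y) 1))
          (dp.getD (dp.length - 1) [])) := by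
  intro L
  induction L with
  | nil =>
    intro dp hne
    have hl : 0 < dp.length := List.length_pos_iff.mpr hne
    simp only [List.foldl_nil]
    exact (pvSet_getD_self dp (dp.length - 1) [] (by omega)).symm
  | cons y L ih =>
    intro dp hne
    have hl : 0 < dp.length := List.length_pos_iff.mpr hne
    simp only [List.foldl_cons]
    have hstep : gset dp (-1) y (max (gget dp (-1) (y + 1) - gget dungeon (-1) y) 1)
        = dp.set (dp.length - 1) (PySem.List.pySetD (dp.getD (dp.length - 1) []) y
            (max (PySem.List.pyGetD (dp.getD (dp.length - 1) []) (y + 1) 0 - gget dungeon (-1) y) 1)) := by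
      simp only [gset, gget, ggetRow]
      rw [pvPyGetD_neg_one dp [] hne, pvPySetD_neg_one dp _ hne]
    rw [hstep]
    have hne' : dp.set (dp.length - 1) (PySem.List.pySetD (dp.getD (dp.length - 1) []) y
            (max (PySem.List.pyGetD (dp.getD (dp.length - 1) []) (y + 1) 0 - gget dungeon (-1) y) 1)) ≠ [] :=
      List.length_pos_iff.mp (by simpa using hl)
    rw [ih _ hne']
    simp only [List.length_set]
    rw [pvGetD_set_self _ _ _ _ (by omega), List.set_set]

-- table-level: one x-iteration of the dp pass only rewrites row x
theorem inner_comm (dungeon : List (List Int)) (xn : Nat) :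
    ∀ (L : List Int) (dp : List (List Int)), xn + 1 < dp.length →
    L.foldl (fun d y =>
        gset d (xn : Int) y (min (max (gget d (xn : Int) (y + 1) - gget dungeon (xn : Int) y) 1)
                                 (max (gget d ((xn : Int) + 1) y - gget dungeon (xn : Int) y) 1))) dp
    = dp.set xn
        (L.foldl (fun cur y => PySem.List.pySetD cur y
          (min (max (PySem.List.pyGetD cur (y + 1) 0 - gget dungeon (xn : Int) y) 1)
               (max (PySem.List.pyGetD (dp.getD (xn + 1) []) y 0 - gget dungeon (xn : Int) y) 1)))
          (dp.getD xn [])) := by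
  intro L
  induction L with
  | nil =>
    intro dp hx
    simp only [List.foldl_nil]
    exact (pvSet_getD_self dp xn [] (by omega)).symm
  | cons y L ih =>
    intro dp hx
    simp only [List.foldl_cons]
    have hc : ((xn : Int) + 1) = ((xn + 1 : Nat) : Int) := by push_cast; ring
    have hstep : gset dp (xn : Int) y
          (min (max (gget dp (xn : Int) (y + 1) - gget dungeon (xn : Int) y) 1)
               (max (gget dp ((xn : Int) + 1) y - gget dungeon (xn : Int) y) 1))
        = dp.set xn (PySem.List.pySetD (dp.getD xn []) y
            (min (max (PySem.List.pyGetD (dp.getD xn []) (y + 1) 0 - gget dungeon (xn : Int) y) 1)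
                 (max (PySem.List.pyGetD (dp.getD (xn + 1) []) y 0 - gget dungeon (xn : Int) y) 1))) := by
      simp only [gset, ggetRow, hc]
      simp only [gget, ggetRow, PySem.List.pySetD_natCast, PySem.List.pyGetD_natCast]
    rw [hstep]
    have hlen' : xn + 1 < (dp.set xn (PySem.List.pySetD (dp.getD xn []) y
            (min (max (PySem.List.pyGetD (dp.getD xn []) (y + 1) 0 - gget dungeon (xn : Int) y) 1)
                 (max (PySem.List.pyGetD (dp.getD (xn + 1) []) y 0 - gget dungeon (xn : Int) y) 1)))).length := by
      simpa using hx
    rw [ih _ hlen']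
    rw [pvGetD_set_self _ _ _ _ (by omega), List.set_set]
    rw [pvGetD_set_ne _ _ _ _ _ (by omega)]

theorem lastNeed_drop (dungeon : List (List Int)) (t : Nat) (h : t + 2 ≤ dungeon.length) :
    lastNeed (dungeon.drop t)
      = max (lastNeed (dungeon.drop (t + 1))
          - (dungeon.getD t []).getD ((dungeon.getD t []).length - 1) 0) 1 := by
  rw [pvDrop_eq_getD_cons dungeon t [] (by omega)]
  obtain ⟨r2, rest, h2⟩ : ∃ r2 rest, dungeon.drop (t + 1) = r2 :: rest := by
    cases hdd : dungeon.drop (t + 1) with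
    | nil => exact absurd (congrArg List.length hdd) (by simp; omega)
    | cons r2 rest => exact ⟨r2, rest, rfl⟩
  rw [h2]
  rfl

theorem bGo_drop (dungeon : List (List Int)) (t : Nat) (h : t + 2 ≤ dungeon.length) :
    bGo (dungeon.drop t) = bRowStep (dungeon.getD t []) (bGo (dungeon.drop (t + 1))) := by
  rw [pvDrop_eq_getD_cons dungeon t [] (by omega)]
  obtain ⟨r2, rest, h2⟩ : ∃ r2 rest, dungeon.drop (t + 1) = r2 :: rest := by
    cases hdd : dungeon.drop (t + 1) with
    | nil => exact absurd (congrArg List.length hdd) (by simp; omega)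
    | cons r2 rest => exact ⟨r2, rest, rfl⟩
  rw [h2]
  rfl

theorem colRowE_length (n : Nat) (c : Int) : (colRowE n c).length = n := by
  simp [colRowE]

theorem colRowE_getD_last (n : Nat) (c : Int) (hn : 0 < n) :
    (colRowE n c).getD (n - 1) 0 = c :=
  pvGetD_set_self (List.replicate n 0) (n - 1) c 0 (by simp; omega)

theorem pvMapConstRange {α : Type} (N : Nat) (c : α) :
    (PySem.List.pyRange 0 (N : Int) 1).map (fun _ => c) = List.replicate N c := by
  have h : ∀ l : List Int, l.map (fun _ => c) = List.replicate l.length c := by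
    intro l
    induction l with
    | nil => simp
    | cons a t ih => simp [ih, List.replicate]
  rw [h, PySem.List.length_pyRange_one]
  norm_num

-- the last-column pass
theorem col_pass (dungeon : List (List Int)) (n : Nat) (hn : 0 < n)
    (hlen : ∀ r ∈ dungeon, r.length = n) :
    ∀ (t : Nat) (a : Int), a + 1 = (t : Int) → a ≤ (dungeon.length : Int) - 2 →
    ∀ dp : List (List Int), dp.length = dungeon.length →
    (∀ k : Nat, k < dungeon.length →
      (a < (k : Int) → dp.getD k [] =
        (if k = dungeon.length - 1 then bLastRow (dungeon.getD (dungeon.length - 1) [])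
         else colRowE n (lastNeed (dungeon.drop k)))) ∧
      ((k : Int) ≤ a → dp.getD k [] = List.replicate n 0)) →
    ((PySem.List.pyRange a (-1) (-1)).foldl
        (fun dp x => gset dp x (-1) (max (gget dp (x + 1) (-1) - gget dungeon x (-1)) 1)) dp).length
      = dungeon.length ∧
    ∀ k : Nat, k < dungeon.length →
      ((PySem.List.pyRange a (-1) (-1)).foldl
        (fun dp x => gset dp x (-1) (max (gget dp (x + 1) (-1) - gget dungeon x (-1)) 1)) dp).getD k []
      = (if k = dungeon.length - 1 then bLastRow (dungeon.getD (dungeon.length - 1) [])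
         else colRowE n (lastNeed (dungeon.drop k))) := by
  intro t
  induction t with
  | zero =>
    intro a ha hb dp hdplen hinv
    have ha' : a = -1 := by omega
    subst ha'
    rw [PySem.List.pyRange_neg_one_eq_nil (by norm_num)]
    simp only [List.foldl_nil]
    exact ⟨hdplen, fun k hk => (hinv k hk).1 (by omega)⟩
  | succ t ih =>
    intro a ha hb dp hdplen hinv
    have ha' : a = (t : Int) := by omega
    subst ha'
    have hm2 : t + 2 ≤ dungeon.length := by omega
    have hrowD_len : (dungeon.getD t []).length = n := by
      apply hlen
      rw [List.getD_eq_getElem dungeon [] (by omega)]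
      exact List.getElem_mem _
    have hrt : dp.getD t [] = List.replicate n 0 := (hinv t (by omega)).2 (by omega)
    have hrt1 := (hinv (t + 1) (by omega)).1 (by push_cast; omega)
    have hlen1 : (dp.getD (t + 1) []).length = n := by
      rw [hrt1]
      split_ifs with hc1
      · rw [bLastRow_length]
        apply hlen
        rw [List.getD_eq_getElem dungeon [] (by omega)]
        exact List.getElem_mem _
      · exact colRowE_length n _
    have hne1 : dp.getD (t + 1) [] ≠ [] := by
      intro hh; rw [hh] at hlen1; simp at hlen1; omega
    have hlast : (dp.getD (t + 1) []).getD ((dp.getD (t + 1) []).length - 1) 0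
        = lastNeed (dungeon.drop (t + 1)) := by
      rw [hlen1, hrt1]
      split_ifs with hc1
      · have hlr_len : (dungeon.getD (dungeon.length - 1) []).length = n := by
          apply hlen
          rw [List.getD_eq_getElem dungeon [] (by omega)]
          exact List.getElem_mem _
        have hdrop : dungeon.drop (t + 1) = [dungeon.getD (dungeon.length - 1) []] := by
          rw [hc1, pvDrop_eq_getD_cons dungeon (dungeon.length - 1) [] (by omega),
            show dungeon.length - 1 + 1 = dungeon.length by omega, List.drop_length]
        rw [hdrop, ← hlr_len,
          bLastRow_getD_last _ (by intro hh; rw [hh] at hlr_len; simp at hlr_len; omega)]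
        rfl
      · exact colRowE_getD_last n _ hn
    have hrowDne : dungeon.getD t [] ≠ [] := by
      intro hh; rw [hh] at hrowD_len; simp at hrowD_len; omega
    have hc : ((t : Int) + 1) = ((t + 1 : Nat) : Int) := by push_cast; ring
    have hstep : gset dp (t : Int) (-1)
          (max (gget dp ((t : Int) + 1) (-1) - gget dungeon (t : Int) (-1)) 1)
        = dp.set t (colRowE n (lastNeed (dungeon.drop t))) := by
      simp only [gset, gget, ggetRow, hc, PySem.List.pySetD_natCast, PySem.List.pyGetD_natCast]
      rw [pvPyGetD_neg_one _ 0 hne1, hlast, pvPyGetD_neg_one _ 0 hrowDne, hrt,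
        pvPySetD_neg_one _ _ (by intro hh; have := congrArg List.length hh; simp only [List.length_set, List.length_replicate, List.length_nil] at this; omega),
        lastNeed_drop dungeon t hm2]
      simp [colRowE]
    rw [PySem.List.pyRange_neg_one_cons (by omega), List.foldl_cons, hstep]
    apply ih ((t : Int) - 1) (by omega) (by omega) _ (by simp [hdplen])
    intro k hk
    constructor
    · intro hk2
      rcases eq_or_ne k t with rfl | hne
      · rw [pvGetD_set_self _ _ _ _ (by omega), if_neg (by omega)]
      · rw [pvGetD_set_ne _ _ _ _ _ (Ne.symm hne)]
        exact (hinv k hk).1 (by omega)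
    · intro hk2
      rw [pvGetD_set_ne _ _ _ _ _ (by omega)]
      exact (hinv k hk).2 (by omega)

-- the main dp pass
theorem dp_pass (dungeon : List (List Int)) (n : Nat) (hn : 0 < n)
    (hlen : ∀ r ∈ dungeon, r.length = n) :
    ∀ (t : Nat) (a : Int), a + 1 = (t : Int) → a ≤ (dungeon.length : Int) - 2 →
    ∀ dp : List (List Int), dp.length = dungeon.length →
    (∀ k : Nat, k < dungeon.length →
      (a < (k : Int) → dp.getD k [] = bGo (dungeon.drop k)) ∧
      ((k : Int) ≤ a → dp.getD k [] = colRowE n (lastNeed (dungeon.drop k)))) →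
    ∀ k : Nat, k < dungeon.length →
      ((PySem.List.pyRange a (-1) (-1)).foldl
        (fun dp x =>
          (PySem.List.pyRange (((ggetRow dungeon x).length : Int) - 2) (-1) (-1)).foldl
            (fun dp y =>
              gset dp x y (min (max (gget dp x (y + 1) - gget dungeon x y) 1)
                               (max (gget dp (x + 1) y - gget dungeon x y) 1))) dp) dp).getD k []
      = bGo (dungeon.drop k) := by
  intro t
  induction t with
  | zero =>
    intro a ha hb dp hdplen hinv
    have ha' : a = -1 := by omega
    subst ha'
    rw [PySem.List.pyRange_neg_one_eq_nil (by norm_num)]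
    simp only [List.foldl_nil]
    exact fun k hk => (hinv k hk).1 (by omega)
  | succ t ih =>
    intro a ha hb dp hdplen hinv
    have ha' : a = (t : Int) := by omega
    subst ha'
    have hm2 : t + 2 ≤ dungeon.length := by omega
    have hrowD_len : (dungeon.getD t []).length = n := by
      apply hlen
      rw [List.getD_eq_getElem dungeon [] (by omega)]
      exact List.getElem_mem _
    have hdropne : dungeon.drop (t + 1) ≠ [] := by
      intro hh; exact absurd (congrArg List.length hh) (by simp; omega)
    have hdroplen : ∀ r ∈ dungeon.drop (t + 1), r.length = n :=
      fun r hr => hlen r (List.drop_subset _ _ hr)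
    have hprevlen : (bGo (dungeon.drop (t + 1))).length = n :=
      bGo_length _ n hdropne hdroplen
    have hcur0 : dp.getD t [] = colRowE n (lastNeed (dungeon.drop t)) :=
      (hinv t (by omega)).2 (by omega)
    have hprev : dp.getD (t + 1) [] = bGo (dungeon.drop (t + 1)) :=
      (hinv (t + 1) (by omega)).1 (by push_cast; omega)
    rw [PySem.List.pyRange_neg_one_cons (by omega), List.foldl_cons,
      inner_comm dungeon t _ dp (by omega)]
    have hstep : (PySem.List.pyRange (((ggetRow dungeon (t : Int)).length : Int) - 2) (-1) (-1)).foldl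
          (fun cur y => PySem.List.pySetD cur y
            (min (max (PySem.List.pyGetD cur (y + 1) 0 - gget dungeon (t : Int) y) 1)
                 (max (PySem.List.pyGetD (dp.getD (t + 1) []) y 0 - gget dungeon (t : Int) y) 1)))
          (dp.getD t [])
        = bGo (dungeon.drop t) := by
      simp only [gget, ggetRow, PySem.List.pyGetD_natCast]
      rw [hprev, hcur0, hrowD_len, bGo_drop dungeon t hm2]
      apply rowfill_dp (dungeon.getD t []) (bGo (dungeon.drop (t + 1))) (by omega) (n - 1)
        ((n : Int) - 2) (by omega) (by rw [hrowD_len]; omega)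
      · rw [colRowE_length, hrowD_len]
      · intro k hk1 hk2
        rw [hrowD_len] at hk2
        have hk : k = n - 1 := by omega
        subst hk
        rw [colRowE_getD_last n _ hn, ← hrowD_len,
          bRowStep_getD_last _ _ (by omega)
            (by intro hh; rw [hh] at hrowD_len; simp at hrowD_len; omega)]
        rw [hrowD_len, bGo_last _ n hn hdropne hdroplen, lastNeed_drop dungeon t hm2, hrowD_len]
    rw [hstep]
    apply ih ((t : Int) - 1) (by omega) (by omega) _ (by simp [hdplen])
    intro k hk
    constructor
    · intro hk2
      rcases eq_or_ne k t with rfl | hne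
      · rw [pvGetD_set_self _ _ _ _ (by omega)]
      · rw [pvGetD_set_ne _ _ _ _ _ (Ne.symm hne)]
        exact (hinv k hk).1 (by omega)
    · intro hk2
      rw [pvGetD_set_ne _ _ _ _ _ (by omega)]
      exact (hinv k hk).2 (by omega)

-- A computes the backward need of the whole grid
theorem A_eq_need (dungeon : List (List Int)) (hpre : Pre_calculateMinimumHPDP dungeon) :
    calculateMinimumHPDP dungeon = (bGo dungeon).headD 0 := by
  obtain ⟨hne, hhead, hrows⟩ := hpre
  have hm : 0 < dungeon.length := List.length_pos_iff.mpr hne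
  have hn : 0 < (dungeon.headD []).length := List.length_pos_iff.mpr hhead
  have hlrow_mem : dungeon.getD (dungeon.length - 1) [] ∈ dungeon := by
    rw [List.getD_eq_getElem dungeon [] (by omega)]
    exact List.getElem_mem _
  have hlrowlen : (dungeon.getD (dungeon.length - 1) []).length = (dungeon.headD []).length :=
    hrows _ hlrow_mem
  have hlrowne : dungeon.getD (dungeon.length - 1) [] ≠ [] :=
    List.length_pos_iff.mp (by rw [hlrowlen]; omega)
  have hg0 : ggetRow dungeon 0 = dungeon.headD [] := by
    simp only [ggetRow, PySem.List.pyGetD_zero]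
    cases dungeon with
    | nil => exact absurd rfl hne
    | cons r t => simp [List.getD]
  have hgneg : PySem.List.pyGetD dungeon (-1) [] = dungeon.getD (dungeon.length - 1) [] :=
    pvPyGetD_neg_one dungeon [] hne
  have hdropm : dungeon.drop (dungeon.length - 1) = [dungeon.getD (dungeon.length - 1) []] := by
    rw [pvDrop_eq_getD_cons dungeon (dungeon.length - 1) [] (by omega),
      show dungeon.length - 1 + 1 = dungeon.length by omega, List.drop_length]
  simp only [calculateMinimumHPDP, hg0, pvMapConstRange]
  -- dp1
  have hdp1 : gset (List.replicate dungeon.length (List.replicate (dungeon.headD []).length 0))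
        (-1) (-1) (max (1 - gget dungeon (-1) (-1)) 1)
      = (List.replicate dungeon.length (List.replicate (dungeon.headD []).length 0)).set
          (dungeon.length - 1)
          (colRowE (dungeon.headD []).length
            (max (1 - (dungeon.getD (dungeon.length - 1) []).getD ((dungeon.headD []).length - 1) 0) 1)) := by
    simp only [gset, gget, ggetRow, hgneg]
    rw [pvPyGetD_neg_one _ 0 hlrowne, hlrowlen,
      pvPySetD_neg_one (List.replicate dungeon.length (List.replicate (dungeon.headD []).length 0)) _
        (by intro hh; have := congrArg List.length hh; simp only [List.length_set, List.length_replicate, List.length_nil] at this; omega),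
      pvPyGetD_neg_one (List.replicate dungeon.length (List.replicate (dungeon.headD []).length 0)) []
        (by intro hh; have := congrArg List.length hh; simp only [List.length_set, List.length_replicate, List.length_nil] at this; omega)]
    simp only [List.length_replicate]
    rw [pvGetD_replicate dungeon.length (dungeon.length - 1) _ [] (by omega),
      pvPySetD_neg_one _ _ (by intro hh; have := congrArg List.length hh; simp only [List.length_set, List.length_replicate, List.length_nil] at this; omega)]
    simp only [List.length_replicate, colRowE]
  rw [hdp1]
  -- dp2 : the last-row pass
  have hdp2 : (PySem.List.pyRange (((ggetRow dungeon (-1)).length : Int) - 2) (-1) (-1)).foldl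
        (fun dp y => gset dp (-1) y (max (gget dp (-1) (y + 1) - gget dungeon (-1) y) 1))
        ((List.replicate dungeon.length (List.replicate (dungeon.headD []).length 0)).set
          (dungeon.length - 1)
          (colRowE (dungeon.headD []).length
            (max (1 - (dungeon.getD (dungeon.length - 1) []).getD ((dungeon.headD []).length - 1) 0) 1)))
      = (List.replicate dungeon.length (List.replicate (dungeon.headD []).length 0)).set
          (dungeon.length - 1) (bLastRow (dungeon.getD (dungeon.length - 1) [])) := by
    rw [last_comm dungeon _ _ (by intro hh; have := congrArg List.length hh; simp only [List.length_set, List.length_replicate, List.length_nil] at this; omega)]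
    simp only [List.length_set, List.length_replicate]
    rw [pvGetD_set_self _ _ _ _ (by simp; omega), List.set_set]
    congr 1
    have hrowfun : (fun (cur : List Int) (y : Int) => PySem.List.pySetD cur y
          (max (PySem.List.pyGetD cur (y + 1) 0 - gget dungeon (-1) y) 1))
        = (fun (cur : List Int) (y : Int) => PySem.List.pySetD cur y
          (max (PySem.List.pyGetD cur (y + 1) 0
              - PySem.List.pyGetD (dungeon.getD (dungeon.length - 1) []) y 0) 1)) := by
      funext cur y
      simp only [gget, ggetRow, hgneg]
    rw [hrowfun]
    have hbound : (((ggetRow dungeon (-1)).length : Int) - 2)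
        = ((dungeon.headD []).length : Int) - 2 := by
      simp only [ggetRow, hgneg, hlrowlen]
    rw [hbound]
    apply rowfill_last (dungeon.getD (dungeon.length - 1) []) ((dungeon.headD []).length - 1)
      (((dungeon.headD []).length : Int) - 2) (by omega) (by rw [hlrowlen]; omega)
    · rw [colRowE_length, hlrowlen]
    · intro k hk1 hk2
      rw [hlrowlen] at hk2
      have hk : k = (dungeon.headD []).length - 1 := by omega
      subst hk
      rw [colRowE_getD_last _ _ hn, ← hlrowlen,
        bLastRow_getD_last _ hlrowne, hlrowlen]
  rw [hdp2]
  -- dp3 : the last-column pass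
  have hcol := col_pass dungeon (dungeon.headD []).length hn hrows (dungeon.length - 1)
    ((dungeon.length : Int) - 2) (by omega) (by omega)
    ((List.replicate dungeon.length (List.replicate (dungeon.headD []).length 0)).set
      (dungeon.length - 1) (bLastRow (dungeon.getD (dungeon.length - 1) [])))
    (by simp)
    (by
      intro k hk
      constructor
      · intro hk2
        have : k = dungeon.length - 1 := by omega
        subst this
        rw [pvGetD_set_self _ _ _ _ (by simp; omega), if_pos rfl]
      · intro hk2
        rw [pvGetD_set_ne _ _ _ _ _ (by omega)]
        exact pvGetD_replicate dungeon.length k _ [] hk)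
  -- dp4 : the main dp pass
  have hdp4 := dp_pass dungeon (dungeon.headD []).length hn hrows (dungeon.length - 1)
    ((dungeon.length : Int) - 2) (by omega) (by omega) _ hcol.1
    (by
      intro k hk
      constructor
      · intro hk2
        have hk' : k = dungeon.length - 1 := by omega
        subst hk'
        rw [hcol.2 _ hk, if_pos rfl, hdropm]
        rfl
      · intro hk2
        rw [hcol.2 _ hk, if_neg (by omega)])
  have hfin : ∀ dp : List (List Int), gget dp 0 0 = (dp.getD 0 []).getD 0 0 := by
    intro dp
    simp [gget, ggetRow, PySem.List.pyGetD_zero]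
  rw [hfin, hdp4 0 hm, List.drop_zero,
    pvHeadD_eq_getD _ 0 0 (bGo_ne_nil dungeon (dungeon.headD []).length hn hne hrows)]

-- ---- B-side: structural form of the forward sweep ----
def rowRec (left : Option Int) : List (Int × Option Int) → List (Option Int)
  | [] => []
  | du :: rest => pvStep left du :: rowRec (pvStep left du) rest

def rowsGo : List (Option Int) → List (List Int) → List (Option Int)
  | cur, [] => cur
  | cur, r :: rest => rowsGo (rowRec none (r.zip cur)) rest

-- first row gets left0 (= hp), later rows start with left = None
def rowsGoL (left0 : Option Int) (cur : List (Option Int)) : List (List Int) → List (Option Int)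
  | [] => cur
  | r :: rest => rowsGo (rowRec left0 (r.zip cur)) rest

theorem rowRec_length : ∀ (l : List (Int × Option Int)) (left : Option Int),
    (rowRec left l).length = l.length := by
  intro l
  induction l with
  | nil => intro left; simp [rowRec]
  | cons du rest ih => intro left; simp [rowRec, ih]

theorem rowRec_ne_nil (l : List (Int × Option Int)) (left : Option Int) (h : l ≠ []) :
    rowRec left l ≠ [] := by
  cases l with
  | nil => exact absurd rfl h
  | cons du rest => simp [rowRec]

-- the inner loop of B's feasible is rowRec
theorem pvRowLoop_eq (row : List Int) (cur : List (Option Int)) (left0 : Option Int) :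
    pvRowLoop row cur left0 = rowRec left0 (row.zip cur) := by
  suffices h : ∀ (l : List (Int × Option Int)) (acc : List (Option Int)) (left : Option Int),
      (l.foldl (fun (st : List (Option Int) × Option Int) du =>
        (st.1 ++ [pvStep st.2 du], pvStep st.2 du)) (acc, left)).1 = acc ++ rowRec left l by
    simpa [pvRowLoop] using h (row.zip cur) [] left0
  intro l
  induction l with
  | nil => intro acc left; simp [rowRec]
  | cons du rest ih =>
    intro acc left
    simp only [List.foldl_cons, rowRec]
    rw [ih]
    simp

-- the outer loop of B's feasible is rowsGoL
theorem pvFwd_eq (dungeon : List (List Int)) (hp : Int) (n : Nat) :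
    pvFwd dungeon hp n = rowsGoL (some hp) (List.replicate n none) dungeon := by
  have hrest : ∀ (rows : List (List Int)) (c : List (Option Int)),
      (rows.foldl (fun (st : List (Option Int) × Bool) row =>
        (pvRowLoop row st.1 (if st.2 then some hp else none), false)) (c, false)).1
      = rowsGo c rows := by
    intro rows
    induction rows with
    | nil => intro c; simp [rowsGo]
    | cons r rest ih =>
      intro c
      simp only [List.foldl_cons, if_neg Bool.false_ne_true, rowsGo]
      rw [ih, pvRowLoop_eq]
  cases dungeon with
  | nil => simp [pvFwd, rowsGoL]
  | cons r rest =>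
    simp only [pvFwd, List.foldl_cons, rowsGoL, if_true]
    rw [hrest, pvRowLoop_eq]

-- pvCand combine: a lower bound through either argument
theorem pvCand_left (l : Int) (up : Option Int) :
    ∃ c, pvCand (some l) up = some c ∧ l ≤ c := by
  cases up with
  | none => exact ⟨l, rfl, le_refl l⟩
  | some u => exact ⟨max l u, rfl, le_max_left l u⟩

theorem pvCand_right (left : Option Int) (u : Int) :
    ∃ c, pvCand left (some u) = some c ∧ u ≤ c := by
  cases left with
  | none => exact ⟨u, rfl, le_refl u⟩
  | some l => exact ⟨max l u, rfl, le_max_right l u⟩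

-- pvCand combine of two bounded-bad arguments stays none or bounded-bad
theorem pvCand_bad (left up : Option Int) (b : Int)
    (hl : left = none ∨ ∃ l, left = some l ∧ 1 ≤ l ∧ l < b)
    (hu : up = none ∨ ∃ u, up = some u ∧ 1 ≤ u ∧ u < b) :
    pvCand left up = none ∨ ∃ c, pvCand left up = some c ∧ 1 ≤ c ∧ c < b := by
  rcases hl with rfl | ⟨l, rfl, hl1, hl2⟩
  · rcases hu with rfl | ⟨u, rfl, hu1, hu2⟩
    · exact Or.inl rfl
    · exact Or.inr ⟨u, rfl, hu1, hu2⟩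
  · rcases hu with rfl | ⟨u, rfl, hu1, hu2⟩
    · exact Or.inr ⟨l, rfl, hl1, hl2⟩
    · exact Or.inr ⟨max l u, rfl, le_max_of_le_left hl1, max_lt hl2 hu2⟩

-- the needs are all ≥ 1
theorem bLastRow_ge_one : ∀ (r : List Int), ∀ x ∈ bLastRow r, 1 ≤ x := by
  intro r
  induction r with
  | nil => simp [bLastRow]
  | cons a t ih =>
    cases t with
    | nil => simp [bLastRow]
    | cons b rest =>
      intro x hx
      simp only [bLastRow, List.mem_cons] at hx
      rcases hx with rfl | hx
      · exact le_max_right _ 1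
      · exact ih x hx

theorem bRowStep_ge_one : ∀ (r nb : List Int), ∀ x ∈ bRowStep r nb, 1 ≤ x := by
  intro r
  induction r with
  | nil => intro nb x hx; simp [bRowStep] at hx
  | cons a t ih =>
    intro nb x hx
    cases nb with
    | nil => simp [bRowStep] at hx
    | cons b bs =>
      cases t with
      | nil =>
        simp only [bRowStep, List.mem_cons, List.not_mem_nil, or_false] at hx
        subst hx; exact le_max_right _ 1
      | cons c rest =>
        simp only [bRowStep, List.mem_cons] at hx
        rcases hx with rfl | hx
        · exact le_max_right _ 1
        · exact ih bs x hx

theorem bGo_ge_one : ∀ (rows : List (List Int)), ∀ x ∈ bGo rows, 1 ≤ x := by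
  intro rows
  induction rows with
  | nil => simp [bGo]
  | cons r t ih =>
    cases t with
    | nil => exact fun x hx => bLastRow_ge_one r x hx
    | cons r2 rest => exact fun x hx => bRowStep_ge_one r (bGo (r2 :: rest)) x hx

-- reductions of one sweep step
theorem pvStep_some (left : Option Int) (d : Int) (u : Option Int) (c : Int)
    (hc : pvCand left u = some c) (h1 : 1 ≤ c + d) : pvStep left (d, u) = some (c + d) := by
  simp [pvStep, hc, if_pos h1]

theorem pvStep_dead (left : Option Int) (d : Int) (u : Option Int) (c : Int)
    (hc : pvCand left u = some c) (h1 : ¬ 1 ≤ c + d) : pvStep left (d, u) = none := by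
  simp [pvStep, hc, if_neg h1]

theorem pvStep_none (left : Option Int) (d : Int) (u : Option Int)
    (hc : pvCand left u = none) : pvStep left (d, u) = none := by
  simp [pvStep, hc]

theorem pvGetLast?_cons {α : Type} (a : α) (l : List α) (h : l ≠ []) :
    (a :: l).getLast? = l.getLast? := by
  cases l with
  | nil => exact absurd rfl h
  | cons b t => simp [List.getLast?_cons_cons]

theorem pvHeadD_mem {α : Type} (l : List α) (d : α) (h : l ≠ []) : l.headD d ∈ l := by
  cases l with
  | nil => exact absurd rfl h
  | cons a t => simp

-- GOOD, last row: a cell entered with health ≥ its need carries survival to the corner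
theorem goodLast : ∀ (r : List Int) (cur : List (Option Int)) (left0 : Option Int),
    r.length = cur.length → r ≠ [] →
    ((∃ l, left0 = some l ∧ (bLastRow r).headD 1 ≤ l) ∨
      (∃ (j : Nat) (h : Int), cur[j]? = some (some h) ∧ ∃ x, (bLastRow r)[j]? = some x ∧ x ≤ h)) →
    ∃ v, (rowRec left0 (r.zip cur)).getLast? = some (some v) := by
  intro r
  induction r with
  | nil => intro cur left0 _ hne _; exact absurd rfl hne
  | cons a r' ih =>
    intro cur left0 hlen _ hgood
    cases cur with
    | nil => simp at hlen
    | cons u cur' =>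
    cases r' with
    | nil =>
      have hcur' : cur' = [] := by
        have : cur'.length = 0 := by simpa using hlen.symm
        simpa using this
      subst hcur'
      obtain ⟨c, hc, hcb⟩ : ∃ c, pvCand left0 u = some c ∧ max (1 - a) 1 ≤ c := by
        rcases hgood with ⟨l, rfl, hl⟩ | ⟨j, h, hj, x, hx, hxh⟩
        · obtain ⟨c, hc, hlc⟩ := pvCand_left l u
          exact ⟨c, hc, le_trans (by simpa [bLastRow] using hl) hlc⟩
        · cases j with
          | zero =>
            have hu : u = some h := by simpa using hj
            subst hu
            obtain ⟨c, hc, hhc⟩ := pvCand_right left0 h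
            have hx' : x = max (1 - a) 1 := by
              have := hx
              simp [bLastRow] at this
              omega
            exact ⟨c, hc, by omega⟩
          | succ j' => simp at hj
      refine ⟨c + a, ?_⟩
      rw [show (a :: []).zip (u :: []) = [(a, u)] from rfl]
      rw [show rowRec left0 [(a, u)] = [pvStep left0 (a, u)] from rfl]
      rw [pvStep_some left0 a u c hc (by omega)]
      rfl
    | cons a2 r'' =>
      cases cur' with
      | nil => simp at hlen
      | cons u2 cur'' =>
      have hNTne : bLastRow (a2 :: r'') ≠ [] := bLastRow_ne_nil _ (by simp)
      have hN1h : 1 ≤ (bLastRow (a2 :: r'')).headD 1 :=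
        bLastRow_ge_one _ _ (pvHeadD_mem _ 1 hNTne)
      have hzip : (a :: a2 :: r'').zip (u :: u2 :: cur'') = (a, u) :: ((a2 :: r'').zip (u2 :: cur'')) := rfl
      have htailne : rowRec (pvStep left0 (a, u)) ((a2 :: r'').zip (u2 :: cur'')) ≠ [] :=
        rowRec_ne_nil _ _ (by simp)
      rw [hzip, show rowRec left0 ((a, u) :: ((a2 :: r'').zip (u2 :: cur'')))
          = pvStep left0 (a, u) :: rowRec (pvStep left0 (a, u)) ((a2 :: r'').zip (u2 :: cur'')) from rfl,
        pvGetLast?_cons _ _ htailne]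
      -- case analysis on where goodness enters
      have hN0 : (bLastRow (a :: a2 :: r'')).headD 1
          = max ((bLastRow (a2 :: r'')).headD 1 - a) 1 := by
        simp [bLastRow]
      rcases hgood with ⟨l, rfl, hl⟩ | ⟨j, h, hj, x, hx, hxh⟩
      · rw [hN0] at hl
        obtain ⟨c, hc, hlc⟩ := pvCand_left l u
        have hcb : max ((bLastRow (a2 :: r'')).headD 1 - a) 1 ≤ c := by omega
        rw [pvStep_some (some l) a u c hc (by omega)]
        exact ih (u2 :: cur'') (some (c + a)) (by simpa using hlen) (by simp)
          (Or.inl ⟨c + a, rfl, by omega⟩)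
      · cases j with
        | zero =>
          have hu : u = some h := by simpa using hj
          subst hu
          have hx' : x = max ((bLastRow (a2 :: r'')).headD 1 - a) 1 := by
            have h0 : (bLastRow (a :: a2 :: r''))[0]?
                = some (max ((bLastRow (a2 :: r'')).headD 1 - a) 1) := by
              simp [bLastRow]
            rw [h0] at hx
            exact (Option.some.inj hx).symm
          obtain ⟨c, hc, hhc⟩ := pvCand_right left0 h
          have hcb : max ((bLastRow (a2 :: r'')).headD 1 - a) 1 ≤ c := by omega
          rw [pvStep_some left0 a (some h) c hc (by omega)]
          exact ih (u2 :: cur'') (some (c + a)) (by simpa using hlen) (by simp)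
            (Or.inl ⟨c + a, rfl, by omega⟩)
        | succ j' =>
          have hj' : (u2 :: cur'')[j']? = some (some h) := by simpa using hj
          have hx' : (bLastRow (a2 :: r''))[j']? = some x := by
            have : (bLastRow (a :: a2 :: r''))[j' + 1]? = (bLastRow (a2 :: r''))[j']? := by
              simp [bLastRow]
            rw [this] at hx
            exact hx
          exact ih (u2 :: cur'') (pvStep left0 (a, u)) (by simpa using hlen) (by simp)
            (Or.inr ⟨j', h, hj', x, hx', hxh⟩)

-- GOOD, non-last row: goodness reaches some cell of the row below
theorem goodStep : ∀ (r : List Int) (cur : List (Option Int)) (nb : List Int) (left0 : Option Int),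
    r.length = cur.length → r.length = nb.length → r ≠ [] →
    (∀ y ∈ nb, 1 ≤ y) →
    ((∃ l, left0 = some l ∧ (bRowStep r nb).headD 1 ≤ l) ∨
      (∃ (j : Nat) (h : Int), cur[j]? = some (some h) ∧ ∃ x, (bRowStep r nb)[j]? = some x ∧ x ≤ h)) →
    ∃ (j : Nat) (v : Int), (rowRec left0 (r.zip cur))[j]? = some (some v) ∧ ∃ y, nb[j]? = some y ∧ y ≤ v := by
  intro r
  induction r with
  | nil => intro cur nb left0 _ _ hne _ _; exact absurd rfl hne
  | cons a r' ih =>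
    intro cur nb left0 hlen hlnb _ hnb1 hgood
    cases cur with
    | nil => simp at hlen
    | cons u cur' =>
    cases nb with
    | nil => simp at hlnb
    | cons y0 nb' =>
    have hy01 : 1 ≤ y0 := hnb1 y0 (by simp)
    cases r' with
    | nil =>
      have hcur' : cur' = [] := by
        have : cur'.length = 0 := by simpa using hlen.symm
        simpa using this
      have hnb' : nb' = [] := by
        have : nb'.length = 0 := by simpa using hlnb.symm
        simpa using this
      subst hcur'; subst hnb'
      obtain ⟨c, hc, hcb⟩ : ∃ c, pvCand left0 u = some c ∧ max (y0 - a) 1 ≤ c := by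
        rcases hgood with ⟨l, rfl, hl⟩ | ⟨j, h, hj, x, hx, hxh⟩
        · obtain ⟨c, hc, hlc⟩ := pvCand_left l u
          have : (bRowStep [a] [y0]).headD 1 = max (y0 - a) 1 := by simp [bRowStep]
          exact ⟨c, hc, by omega⟩
        · cases j with
          | zero =>
            have hu : u = some h := by simpa using hj
            subst hu
            obtain ⟨c, hc, hhc⟩ := pvCand_right left0 h
            have hx' : x = max (y0 - a) 1 := by
              have h0 : (bRowStep [a] [y0])[0]? = some (max (y0 - a) 1) := by simp [bRowStep]
              rw [h0] at hx
              exact (Option.some.inj hx).symm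
            exact ⟨c, hc, by omega⟩
          | succ j' => simp at hj
      refine ⟨0, c + a, ?_, y0, by simp, by omega⟩
      rw [show ([a].zip [u]) = [(a, u)] from rfl,
        show rowRec left0 [(a, u)] = [pvStep left0 (a, u)] from rfl,
        pvStep_some left0 a u c hc (by omega)]
      simp
    | cons a2 r'' =>
      cases cur' with
      | nil => simp at hlen
      | cons u2 cur'' =>
      cases nb' with
      | nil => simp at hlnb
      | cons y1 nb''=>
      have hNTne : bRowStep (a2 :: r'') (y1 :: nb'') ≠ [] := bRowStep_ne_nil _ _ (by simp) (by simp)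
      have hN1h : 1 ≤ (bRowStep (a2 :: r'') (y1 :: nb'')).headD 1 :=
        bRowStep_ge_one _ _ _ (pvHeadD_mem _ 1 hNTne)
      have hN0 : (bRowStep (a :: a2 :: r'') (y0 :: y1 :: nb'')).headD 1
          = max (min ((bRowStep (a2 :: r'') (y1 :: nb'')).headD 1) y0 - a) 1 := by
        simp [bRowStep]
      have hzip : (a :: a2 :: r'').zip (u :: u2 :: cur'')
          = (a, u) :: ((a2 :: r'').zip (u2 :: cur'')) := rfl
      have hrec : rowRec left0 ((a, u) :: ((a2 :: r'').zip (u2 :: cur'')))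
          = pvStep left0 (a, u) :: rowRec (pvStep left0 (a, u)) ((a2 :: r'').zip (u2 :: cur'')) := rfl
      -- helper finishing from goodness at the head
      have hhead : ∀ c : Int, pvCand left0 u = some c →
          max (min ((bRowStep (a2 :: r'') (y1 :: nb'')).headD 1) y0 - a) 1 ≤ c →
          ∃ (j : Nat) (v : Int), (rowRec left0 ((a :: a2 :: r'').zip (u :: u2 :: cur'')))[j]? = some (some v) ∧
            ∃ y, (y0 :: y1 :: nb'')[j]? = some y ∧ y ≤ v := by
        intro c hc hcb
        rw [hzip, hrec, pvStep_some left0 a u c hc (by omega)]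
        by_cases hmin : y0 ≤ (bRowStep (a2 :: r'') (y1 :: nb'')).headD 1
        · exact ⟨0, c + a, by simp, y0, by simp, by omega⟩
        · obtain ⟨j, v, hjv, y, hy, hyv⟩ := ih (u2 :: cur'') (y1 :: nb'') (some (c + a))
            (by simpa using hlen) (by simpa using hlnb) (by simp)
            (fun y hy => hnb1 y (by simp [hy]))
            (Or.inl ⟨c + a, rfl, by omega⟩)
          exact ⟨j + 1, v, by simpa using hjv, y, by simpa using hy, hyv⟩
      rcases hgood with ⟨l, rfl, hl⟩ | ⟨j, h, hj, x, hx, hxh⟩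
      · rw [hN0] at hl
        obtain ⟨c, hc, hlc⟩ := pvCand_left l u
        exact hhead c hc (by omega)
      · cases j with
        | zero =>
          have hu : u = some h := by simpa using hj
          subst hu
          have hx' : x = max (min ((bRowStep (a2 :: r'') (y1 :: nb'')).headD 1) y0 - a) 1 := by
            have h0 : (bRowStep (a :: a2 :: r'') (y0 :: y1 :: nb''))[0]?
                = some (max (min ((bRowStep (a2 :: r'') (y1 :: nb'')).headD 1) y0 - a) 1) := by
              simp [bRowStep]
            rw [h0] at hx
            exact (Option.some.inj hx).symm
          obtain ⟨c, hc, hhc⟩ := pvCand_right left0 h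
          exact hhead c hc (by omega)
        | succ j' =>
          have hj2 : (u2 :: cur'')[j']? = some (some h) := by simpa using hj
          have hx' : (bRowStep (a2 :: r'') (y1 :: nb''))[j']? = some x := by
            have heq : (bRowStep (a :: a2 :: r'') (y0 :: y1 :: nb''))[j' + 1]?
                = (bRowStep (a2 :: r'') (y1 :: nb''))[j']? := by
              simp [bRowStep]
            rw [heq] at hx
            exact hx
          obtain ⟨j, v, hjv, y, hy, hyv⟩ := ih (u2 :: cur'') (y1 :: nb'') (pvStep left0 (a, u))
            (by simpa using hlen) (by simpa using hlnb) (by simp)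
            (fun y hy => hnb1 y (by simp [hy]))
            (Or.inr ⟨j', h, hj2, x, hx', hxh⟩)
          rw [hzip, hrec]
          exact ⟨j + 1, v, by simpa using hjv, y, by simpa using hy, hyv⟩

-- BAD, last row: if every live health is below its cell's need, the corner dies
theorem badLast : ∀ (r : List Int) (cur : List (Option Int)) (left0 : Option Int),
    r.length = cur.length → r ≠ [] →
    (left0 = none ∨ ∃ l, left0 = some l ∧ 1 ≤ l ∧ l < (bLastRow r).headD 1) →
    (∀ (j : Nat) (o : Option Int), cur[j]? = some o → o = none ∨
       ∃ h, o = some h ∧ 1 ≤ h ∧ ∀ x, (bLastRow r)[j]? = some x → h < x) →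
    (rowRec left0 (r.zip cur)).getLast? = some none := by
  intro r
  induction r with
  | nil => intro cur left0 _ hne _ _; exact absurd rfl hne
  | cons a r' ih =>
    intro cur left0 hlen _ hleft hup
    cases cur with
    | nil => simp at hlen
    | cons u cur' =>
    -- the head cell's cand is none or bounded by the head need
    have hu0 := hup 0 u (by simp)
    cases r' with
    | nil =>
      have hcur' : cur' = [] := by
        have : cur'.length = 0 := by simpa using hlen.symm
        simpa using this
      subst hcur'
      have hN0 : (bLastRow [a]).headD 1 = max (1 - a) 1 := by simp [bLastRow]
      have hub : u = none ∨ ∃ h, u = some h ∧ 1 ≤ h ∧ h < max (1 - a) 1 := by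
        rcases hu0 with rfl | ⟨h, rfl, h1, hb⟩
        · exact Or.inl rfl
        · exact Or.inr ⟨h, rfl, h1, hb (max (1 - a) 1) (by simp [bLastRow])⟩
      have hlb : left0 = none ∨ ∃ l, left0 = some l ∧ 1 ≤ l ∧ l < max (1 - a) 1 := by
        rcases hleft with rfl | ⟨l, rfl, h1, hb⟩
        · exact Or.inl rfl
        · exact Or.inr ⟨l, rfl, h1, by rwa [hN0] at hb⟩
      have hstep : pvStep left0 (a, u) = none := by
        rcases pvCand_bad left0 u (max (1 - a) 1) hlb hub with hc | ⟨c, hc, h1, hb⟩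
        · exact pvStep_none left0 a u hc
        · exact pvStep_dead left0 a u c hc (by omega)
      rw [show ([a].zip [u]) = [(a, u)] from rfl,
        show rowRec left0 [(a, u)] = [pvStep left0 (a, u)] from rfl, hstep]
      rfl
    | cons a2 r'' =>
      cases cur' with
      | nil => simp at hlen
      | cons u2 cur'' =>
      have hN0 : (bLastRow (a :: a2 :: r'')).headD 1
          = max ((bLastRow (a2 :: r'')).headD 1 - a) 1 := by simp [bLastRow]
      have hub : u = none ∨ ∃ h, u = some h ∧ 1 ≤ h ∧
          h < max ((bLastRow (a2 :: r'')).headD 1 - a) 1 := by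
        rcases hu0 with rfl | ⟨h, rfl, h1, hb⟩
        · exact Or.inl rfl
        · refine Or.inr ⟨h, rfl, h1, hb _ ?_⟩
          simp [bLastRow]
      have hlb : left0 = none ∨ ∃ l, left0 = some l ∧ 1 ≤ l ∧
          l < max ((bLastRow (a2 :: r'')).headD 1 - a) 1 := by
        rcases hleft with rfl | ⟨l, rfl, h1, hb⟩
        · exact Or.inl rfl
        · exact Or.inr ⟨l, rfl, h1, by rwa [hN0] at hb⟩
      -- the produced left is none or below the next head need
      have hl1 : pvStep left0 (a, u) = none ∨ ∃ v, pvStep left0 (a, u) = some v ∧ 1 ≤ v ∧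
          v < (bLastRow (a2 :: r'')).headD 1 := by
        rcases pvCand_bad left0 u _ hlb hub with hc | ⟨c, hc, h1, hb⟩
        · exact Or.inl (pvStep_none left0 a u hc)
        · by_cases hs : 1 ≤ c + a
          · refine Or.inr ⟨c + a, pvStep_some left0 a u c hc hs, hs, by omega⟩
          · exact Or.inl (pvStep_dead left0 a u c hc hs)
      have htailne : rowRec (pvStep left0 (a, u)) ((a2 :: r'').zip (u2 :: cur'')) ≠ [] :=
        rowRec_ne_nil _ _ (by simp)
      rw [show (a :: a2 :: r'').zip (u :: u2 :: cur'')
          = (a, u) :: ((a2 :: r'').zip (u2 :: cur'')) from rfl,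
        show rowRec left0 ((a, u) :: ((a2 :: r'').zip (u2 :: cur'')))
          = pvStep left0 (a, u) :: rowRec (pvStep left0 (a, u)) ((a2 :: r'').zip (u2 :: cur'')) from rfl,
        pvGetLast?_cons _ _ htailne]
      apply ih (u2 :: cur'') (pvStep left0 (a, u)) (by simpa using hlen) (by simp) hl1
      intro j o hj
      have := hup (j + 1) o (by simpa using hj)
      rcases this with rfl | ⟨h, rfl, h1, hb⟩
      · exact Or.inl rfl
      · refine Or.inr ⟨h, rfl, h1, fun x hx => hb x ?_⟩
        have heq : (bLastRow (a :: a2 :: r''))[j + 1]? = (bLastRow (a2 :: r''))[j]? := by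
          simp [bLastRow]
        rw [heq]
        exact hx

-- BAD, non-last row: every produced cell is dead or below the need of the row below
theorem badStep : ∀ (r : List Int) (cur : List (Option Int)) (nb : List Int) (left0 : Option Int),
    r.length = cur.length → r.length = nb.length → r ≠ [] →
    (left0 = none ∨ ∃ l, left0 = some l ∧ 1 ≤ l ∧ l < (bRowStep r nb).headD 1) →
    (∀ (j : Nat) (o : Option Int), cur[j]? = some o → o = none ∨
       ∃ h, o = some h ∧ 1 ≤ h ∧ ∀ x, (bRowStep r nb)[j]? = some x → h < x) →
    ∀ (j : Nat) (o : Option Int), (rowRec left0 (r.zip cur))[j]? = some o → o = none ∨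
       ∃ v, o = some v ∧ 1 ≤ v ∧ ∀ y, nb[j]? = some y → v < y := by
  intro r
  induction r with
  | nil => intro cur nb left0 _ _ hne _ _; exact absurd rfl hne
  | cons a r' ih =>
    intro cur nb left0 hlen hlnb _ hleft hup
    cases cur with
    | nil => simp at hlen
    | cons u cur' =>
    cases nb with
    | nil => simp at hlnb
    | cons y0 nb' =>
    have hu0 := hup 0 u (by simp)
    cases r' with
    | nil =>
      have hcur' : cur' = [] := by
        have : cur'.length = 0 := by simpa using hlen.symm
        simpa using this
      have hnb'e : nb' = [] := by
        have : nb'.length = 0 := by simpa using hlnb.symm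
        simpa using this
      subst hcur'; subst hnb'e
      have hN0 : (bRowStep [a] [y0]).headD 1 = max (y0 - a) 1 := by simp [bRowStep]
      have hub : u = none ∨ ∃ h, u = some h ∧ 1 ≤ h ∧ h < max (y0 - a) 1 := by
        rcases hu0 with rfl | ⟨h, rfl, h1, hb⟩
        · exact Or.inl rfl
        · exact Or.inr ⟨h, rfl, h1, hb _ (by simp [bRowStep])⟩
      have hlb : left0 = none ∨ ∃ l, left0 = some l ∧ 1 ≤ l ∧ l < max (y0 - a) 1 := by
        rcases hleft with rfl | ⟨l, rfl, h1, hb⟩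
        · exact Or.inl rfl
        · exact Or.inr ⟨l, rfl, h1, by rwa [hN0] at hb⟩
      intro j o hj
      cases j with
      | zero =>
        have ho : o = pvStep left0 (a, u) := by
          rw [show ([a].zip [u]) = [(a, u)] from rfl,
            show rowRec left0 [(a, u)] = [pvStep left0 (a, u)] from rfl] at hj
          simpa using hj.symm
        subst ho
        rcases pvCand_bad left0 u _ hlb hub with hc | ⟨c, hc, h1, hb⟩
        · exact Or.inl (pvStep_none left0 a u hc)
        · by_cases hs : 1 ≤ c + a
          · refine Or.inr ⟨c + a, pvStep_some left0 a u c hc hs, hs, fun y hy => ?_⟩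
            have : y0 = y := by simpa using hy
            omega
          · exact Or.inl (pvStep_dead left0 a u c hc hs)
      | succ j' =>
        rw [show ([a].zip [u]) = [(a, u)] from rfl,
          show rowRec left0 [(a, u)] = [pvStep left0 (a, u)] from rfl] at hj
        simp at hj
    | cons a2 r'' =>
      cases cur' with
      | nil => simp at hlen
      | cons u2 cur'' =>
      cases nb' with
      | nil => simp at hlnb
      | cons y1 nb'' =>
      have hN0 : (bRowStep (a :: a2 :: r'') (y0 :: y1 :: nb'')).headD 1
          = max (min ((bRowStep (a2 :: r'') (y1 :: nb'')).headD 1) y0 - a) 1 := by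
        simp [bRowStep]
      have hub : u = none ∨ ∃ h, u = some h ∧ 1 ≤ h ∧
          h < max (min ((bRowStep (a2 :: r'') (y1 :: nb'')).headD 1) y0 - a) 1 := by
        rcases hu0 with rfl | ⟨h, rfl, h1, hb⟩
        · exact Or.inl rfl
        · refine Or.inr ⟨h, rfl, h1, hb _ ?_⟩
          simp [bRowStep]
      have hlb : left0 = none ∨ ∃ l, left0 = some l ∧ 1 ≤ l ∧
          l < max (min ((bRowStep (a2 :: r'') (y1 :: nb'')).headD 1) y0 - a) 1 := by
        rcases hleft with rfl | ⟨l, rfl, h1, hb⟩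
        · exact Or.inl rfl
        · exact Or.inr ⟨l, rfl, h1, by rwa [hN0] at hb⟩
      -- the head output: dead, or below both y0 and the next head need
      have hl1 : pvStep left0 (a, u) = none ∨ ∃ v, pvStep left0 (a, u) = some v ∧ 1 ≤ v ∧
          v < y0 ∧ v < (bRowStep (a2 :: r'') (y1 :: nb'')).headD 1 := by
        rcases pvCand_bad left0 u _ hlb hub with hc | ⟨c, hc, h1, hb⟩
        · exact Or.inl (pvStep_none left0 a u hc)
        · by_cases hs : 1 ≤ c + a
          · refine Or.inr ⟨c + a, pvStep_some left0 a u c hc hs, hs, by omega, by omega⟩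
          · exact Or.inl (pvStep_dead left0 a u c hc hs)
      intro j o hj
      rw [show (a :: a2 :: r'').zip (u :: u2 :: cur'')
          = (a, u) :: ((a2 :: r'').zip (u2 :: cur'')) from rfl,
        show rowRec left0 ((a, u) :: ((a2 :: r'').zip (u2 :: cur'')))
          = pvStep left0 (a, u) :: rowRec (pvStep left0 (a, u)) ((a2 :: r'').zip (u2 :: cur'')) from rfl] at hj
      cases j with
      | zero =>
        have ho : o = pvStep left0 (a, u) := by simpa using hj.symm
        subst ho
        rcases hl1 with hc | ⟨v, hv, h1, hy0, _⟩
        · exact Or.inl hc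
        · refine Or.inr ⟨v, hv, h1, fun y hy => ?_⟩
          have : y0 = y := by simpa using hy
          omega
      | succ j' =>
        have hj2 : (rowRec (pvStep left0 (a, u)) ((a2 :: r'').zip (u2 :: cur'')))[j']? = some o := by
          simpa using hj
        have hres := ih (u2 :: cur'') (y1 :: nb'') (pvStep left0 (a, u))
          (by simpa using hlen) (by simpa using hlnb) (by simp)
          (by
            rcases hl1 with hc | ⟨v, hv, h1, _, hnh⟩
            · exact Or.inl hc
            · exact Or.inr ⟨v, hv, h1, hnh⟩)
          (by
            intro j o hj
            have := hup (j + 1) o (by simpa using hj)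
            rcases this with rfl | ⟨h, rfl, h1, hb⟩
            · exact Or.inl rfl
            · refine Or.inr ⟨h, rfl, h1, fun x hx => hb x ?_⟩
              have heq : (bRowStep (a :: a2 :: r'') (y0 :: y1 :: nb''))[j + 1]?
                  = (bRowStep (a2 :: r'') (y1 :: nb''))[j]? := by
                simp [bRowStep]
              rw [heq]
              exact hx)
          j' o hj2
        rcases hres with rfl | ⟨v, rfl, h1, hb⟩
        · exact Or.inl rfl
        · refine Or.inr ⟨v, rfl, h1, fun y hy => hb y (by simpa using hy)⟩

theorem rowsGo_length : ∀ (rows : List (List Int)) (cur : List (Option Int)),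
    (∀ r ∈ rows, r.length = cur.length) → (rowsGo cur rows).length = cur.length := by
  intro rows
  induction rows with
  | nil => intro cur _; rfl
  | cons r rest ih =>
    intro cur hw
    have hr : r.length = cur.length := hw r (by simp)
    have hlen : (rowRec none (r.zip cur)).length = cur.length := by
      rw [rowRec_length, List.length_zip]
      omega
    rw [show rowsGo cur (r :: rest) = rowsGo (rowRec none (r.zip cur)) rest from rfl,
      ih _ (fun r2 h2 => by rw [hlen]; exact hw r2 (by simp [h2])), hlen]

theorem rowsGo_eq_rowsGoL (c : List (Option Int)) (r : List Int) (rest : List (List Int)) :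
    rowsGo c (r :: rest) = rowsGoL none c (r :: rest) := rfl

-- GOOD over the remaining rows: survival reaches the final corner
theorem goodRows : ∀ (rows : List (List Int)) (cur : List (Option Int)) (left0 : Option Int),
    rows ≠ [] → (∀ r ∈ rows, r.length = cur.length) → 0 < cur.length →
    ((∃ l, left0 = some l ∧ (bGo rows).headD 1 ≤ l) ∨
      (∃ (j : Nat) (h : Int), cur[j]? = some (some h) ∧ ∃ x, (bGo rows)[j]? = some x ∧ x ≤ h)) →
    ∃ v, (rowsGoL left0 cur rows).getLast? = some (some v) := by
  intro rows
  induction rows with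
  | nil => intro cur left0 hne _ _ _; exact absurd rfl hne
  | cons r rest ih =>
    intro cur left0 _ hw hn hgood
    have hr : r.length = cur.length := hw r (by simp)
    cases rest with
    | nil =>
      rw [show rowsGoL left0 cur [r] = rowRec left0 (r.zip cur) from rfl]
      exact goodLast r cur left0 hr (by intro hh; rw [hh] at hr; simp at hr; omega)
        (by rwa [show bGo [r] = bLastRow r from rfl] at hgood)
    | cons r2 rest2 =>
      have hbody : bGo (r :: r2 :: rest2) = bRowStep r (bGo (r2 :: rest2)) := rfl
      have hgolen : (bGo (r2 :: rest2)).length = cur.length :=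
        bGo_length _ cur.length (by simp) (fun r3 h3 => hw r3 (by simp [h3]))
      obtain ⟨j, v, hjv, y, hy, hyv⟩ := goodStep r cur (bGo (r2 :: rest2)) left0 hr (by omega)
        (by intro hh; rw [hh] at hr; simp at hr; omega)
        (bGo_ge_one _) (by rwa [hbody] at hgood)
      have hlen : (rowRec left0 (r.zip cur)).length = cur.length := by
        rw [rowRec_length, List.length_zip]; omega
      have := ih (rowRec left0 (r.zip cur)) none (by simp)
        (fun r3 h3 => by rw [hlen]; exact hw r3 (by simp [h3])) (by omega)
        (Or.inr ⟨j, v, hjv, y, hy, hyv⟩)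
      rw [show rowsGoL left0 cur (r :: r2 :: rest2)
          = rowsGo (rowRec left0 (r.zip cur)) (r2 :: rest2) from rfl,
        rowsGo_eq_rowsGoL]
      exact this

-- BAD over the remaining rows: the final corner is dead
theorem badRows : ∀ (rows : List (List Int)) (cur : List (Option Int)) (left0 : Option Int),
    rows ≠ [] → (∀ r ∈ rows, r.length = cur.length) → 0 < cur.length →
    (left0 = none ∨ ∃ l, left0 = some l ∧ 1 ≤ l ∧ l < (bGo rows).headD 1) →
    (∀ (j : Nat) (o : Option Int), cur[j]? = some o → o = none ∨
       ∃ h, o = some h ∧ 1 ≤ h ∧ ∀ x, (bGo rows)[j]? = some x → h < x) →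
    (rowsGoL left0 cur rows).getLast? = some none := by
  intro rows
  induction rows with
  | nil => intro cur left0 hne _ _ _ _; exact absurd rfl hne
  | cons r rest ih =>
    intro cur left0 _ hw hn hleft hup
    have hr : r.length = cur.length := hw r (by simp)
    cases rest with
    | nil =>
      rw [show rowsGoL left0 cur [r] = rowRec left0 (r.zip cur) from rfl]
      exact badLast r cur left0 hr (by intro hh; rw [hh] at hr; simp at hr; omega)
        (by rwa [show bGo [r] = bLastRow r from rfl] at hleft)
        (by rwa [show bGo [r] = bLastRow r from rfl] at hup)
    | cons r2 rest2 =>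
      have hbody : bGo (r :: r2 :: rest2) = bRowStep r (bGo (r2 :: rest2)) := rfl
      have hgolen : (bGo (r2 :: rest2)).length = cur.length :=
        bGo_length _ cur.length (by simp) (fun r3 h3 => hw r3 (by simp [h3]))
      have hout := badStep r cur (bGo (r2 :: rest2)) left0 hr (by omega)
        (by intro hh; rw [hh] at hr; simp at hr; omega)
        (by rwa [hbody] at hleft) (by rwa [hbody] at hup)
      have hlen : (rowRec left0 (r.zip cur)).length = cur.length := by
        rw [rowRec_length, List.length_zip]; omega
      rw [show rowsGoL left0 cur (r :: r2 :: rest2)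
          = rowsGo (rowRec left0 (r.zip cur)) (r2 :: rest2) from rfl,
        rowsGo_eq_rowsGoL]
      apply ih (rowRec left0 (r.zip cur)) none (by simp)
        (fun r3 h3 => by rw [hlen]; exact hw r3 (by simp [h3])) (by omega)
        (Or.inl rfl)
      intro j o hj
      rcases hout j o hj with rfl | ⟨v, rfl, h1, hb⟩
      · exact Or.inl rfl
      · exact Or.inr ⟨v, rfl, h1, hb⟩

-- the feasibility test decides 'hp ≥ the backward need'
theorem feasible_char (dungeon : List (List Int)) (hpre : Pre_calculateMinimumHPDP dungeon)
    (hp : Int) (h1 : 1 ≤ hp) :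
    pvFeasible dungeon hp = true ↔ (bGo dungeon).headD 0 ≤ hp := by
  obtain ⟨hne, hhead, hrows⟩ := hpre
  have hn : 0 < (dungeon.headD []).length := List.length_pos_iff.mpr hhead
  have hg0 : PySem.List.pyGetD dungeon 0 [] = dungeon.headD [] := by
    cases dungeon with
    | nil => exact absurd rfl hne
    | cons r t => simp [PySem.List.pyGetD_zero, List.getD]
  have hbne : bGo dungeon ≠ [] := bGo_ne_nil dungeon _ hn hne hrows
  have hhd : (bGo dungeon).headD 0 = (bGo dungeon).headD 1 := by
    cases hbg : bGo dungeon with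
    | nil => exact absurd hbg hbne
    | cons x t => rfl
  have hneed1 : 1 ≤ (bGo dungeon).headD 0 := by
    rw [hhd]; exact bGo_ge_one dungeon _ (pvHeadD_mem _ 1 hbne)
  -- the sweep in structural form
  have hfwd : pvFwd dungeon hp (PySem.List.pyGetD dungeon 0 []).length
      = rowsGoL (some hp) (List.replicate (dungeon.headD []).length none) dungeon := by
    rw [hg0, pvFwd_eq]
  have hwid : ∀ r ∈ dungeon, r.length = (List.replicate (dungeon.headD []).length (none : Option Int)).length := by
    intro r hr; rw [List.length_replicate]; exact hrows r hr
  have hreslen : (rowsGoL (some hp) (List.replicate (dungeon.headD []).length none) dungeon).length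
      = (dungeon.headD []).length := by
    cases dungeon with
    | nil => exact absurd rfl hne
    | cons r rest =>
      rw [show rowsGoL (some hp) (List.replicate ((r :: rest).headD []).length none) (r :: rest)
          = rowsGo (rowRec (some hp) (r.zip (List.replicate ((r :: rest).headD []).length none))) rest from rfl]
      have hr : r.length = ((r :: rest).headD []).length := by simp
      have hlen2 : (rowRec (some hp) (r.zip (List.replicate ((r :: rest).headD []).length none))).length
          = ((r :: rest).headD []).length := by
        rw [rowRec_length, List.length_zip, List.length_replicate]
        omega
      rw [rowsGo_length rest _ (fun r2 h2 => by rw [hlen2]; simpa using hwid r2 (by simp [h2])), hlen2]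
  have hresne : rowsGoL (some hp) (List.replicate (dungeon.headD []).length none) dungeon ≠ [] := by
    intro hh
    rw [hh] at hreslen
    simp only [List.length_nil] at hreslen
    omega
  -- cur[-1] is the last element
  have hlast : PySem.List.pyGetD (pvFwd dungeon hp (PySem.List.pyGetD dungeon 0 []).length) (-1) none
      = ((rowsGoL (some hp) (List.replicate (dungeon.headD []).length none) dungeon).getLast?).getD none := by
    rw [hfwd, pvPyGetD_neg_one _ _ hresne, List.getLast?_eq_getElem?,
      List.getD_eq_getElem?_getD]
  constructor
  · -- feasible → hp ≥ need; contrapositive via badRows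
    intro hfe
    by_contra hlt
    rw [not_le] at hlt
    have hbad := badRows dungeon (List.replicate (dungeon.headD []).length none) (some hp)
      hne hwid (by simpa using hn)
      (Or.inr ⟨hp, rfl, h1, by rw [← hhd]; omega⟩)
      (by
        intro j o hj
        have : o = none := by
          have hjlen : j < (dungeon.headD []).length := by
            by_contra hge
            rw [List.getElem?_eq_none (by simpa using hge)] at hj
            exact absurd hj (by simp)
          rw [List.getElem?_replicate, if_pos hjlen] at hj
          exact (Option.some.inj hj).symm
        exact Or.inl this)
    rw [pvFeasible, hlast, hbad] at hfe
    simp at hfe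
  · -- hp ≥ need → feasible via goodRows
    intro hge
    obtain ⟨v, hv⟩ := goodRows dungeon (List.replicate (dungeon.headD []).length none) (some hp)
      hne hwid (by simpa using hn)
      (Or.inl ⟨hp, rfl, by rw [← hhd]; omega⟩)
    rw [pvFeasible, hlast, hv]
    rfl

-- ---- the upper bound for the binary search ----
def negRow : List Int → Int
  | [] => 0
  | d :: t => (if d < 0 then -d else 0) + negRow t

def negAll : List (List Int) → Int
  | [] => 0
  | r :: t => negRow r + negAll t

theorem negRow_nonneg : ∀ r : List Int, 0 ≤ negRow r := by
  intro r
  induction r with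
  | nil => simp [negRow]
  | cons d t ih => simp only [negRow]; split_ifs with h <;> omega

theorem negAll_nonneg : ∀ rows : List (List Int), 0 ≤ negAll rows := by
  intro rows
  induction rows with
  | nil => simp [negAll]
  | cons r t ih => have := negRow_nonneg r; simp only [negAll]; omega

theorem pvHi_eq (dungeon : List (List Int)) : pvHi dungeon = 1 + negAll dungeon := by
  have hin : ∀ (r : List Int) (s : Int),
      r.foldl (fun s d => if d < 0 then s + -d else s) s = s + negRow r := by
    intro r
    induction r with
    | nil => intro s; simp [negRow]
    | cons d t ih =>
      intro s
      simp only [List.foldl_cons, negRow]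
      split_ifs with h
      · rw [ih]; ring
      · rw [ih]; ring
  have hout : ∀ (rows : List (List Int)) (s : Int),
      rows.foldl (fun s row => row.foldl (fun s d => if d < 0 then s + -d else s) s) s
        = s + negAll rows := by
    intro rows
    induction rows with
    | nil => intro s; simp [negAll]
    | cons r t ih =>
      intro s
      simp only [List.foldl_cons, negAll]
      rw [hin, ih]
      ring
  rw [pvHi, hout]
  ring

theorem bLastRow_le : ∀ r : List Int, ∀ x ∈ bLastRow r, x ≤ 1 + negRow r := by
  intro r
  induction r with
  | nil => simp [bLastRow]
  | cons a t ih =>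
    cases t with
    | nil =>
      intro x hx
      simp only [bLastRow, List.mem_cons, List.not_mem_nil, or_false] at hx
      subst hx
      simp only [negRow]
      split_ifs with h <;> omega
    | cons b rest =>
      intro x hx
      have hTne : bLastRow (b :: rest) ≠ [] := bLastRow_ne_nil _ (by simp)
      have hhdle : (bLastRow (b :: rest)).headD 1 ≤ 1 + negRow (b :: rest) :=
        ih _ (pvHeadD_mem _ 1 hTne)
      have hnn := negRow_nonneg (b :: rest)
      simp only [bLastRow, List.mem_cons] at hx
      rw [show negRow (a :: b :: rest) = (if a < 0 then -a else 0) + negRow (b :: rest) from rfl]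
      rcases hx with rfl | hx
      · split_ifs with h <;> omega
      · have := ih x hx
        split_ifs with h <;> omega

theorem bRowStep_le : ∀ (r nb : List Int) (K : Int), 1 ≤ K → (∀ y ∈ nb, y ≤ K) →
    ∀ x ∈ bRowStep r nb, x ≤ K + negRow r := by
  intro r
  induction r with
  | nil => intro nb K _ _ x hx; simp [bRowStep] at hx
  | cons a t ih =>
    intro nb K hK hnb x hx
    cases nb with
    | nil => simp [bRowStep] at hx
    | cons y0 nbs =>
      have hy0 : y0 ≤ K := hnb y0 (by simp)
      cases t with
      | nil =>
        simp only [bRowStep, List.mem_cons, List.not_mem_nil, or_false] at hx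
        subst hx
        simp only [negRow]
        split_ifs with h <;> omega
      | cons c rest =>
        have hnn := negRow_nonneg (c :: rest)
        simp only [bRowStep, List.mem_cons] at hx
        rw [show negRow (a :: c :: rest) = (if a < 0 then -a else 0) + negRow (c :: rest) from rfl]
        rcases hx with rfl | hx
        · have hmin : min ((bRowStep (c :: rest) nbs).headD 1) y0 ≤ K := le_trans (min_le_right _ _) hy0
          split_ifs with h <;> omega
        · have := ih nbs K hK (fun y hy => hnb y (by simp [hy])) x hx
          split_ifs with h <;> omega

theorem bGo_le : ∀ rows : List (List Int), ∀ x ∈ bGo rows, x ≤ 1 + negAll rows := by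
  intro rows
  induction rows with
  | nil => simp [bGo]
  | cons r t ih =>
    cases t with
    | nil =>
      intro x hx
      have := bLastRow_le r x hx
      simp only [negAll]
      omega
    | cons r2 rest =>
      intro x hx
      have hK : 1 ≤ 1 + negAll (r2 :: rest) := by have := negAll_nonneg (r2 :: rest); omega
      have := bRowStep_le r (bGo (r2 :: rest)) (1 + negAll (r2 :: rest)) hK
        (fun y hy => ih y hy) x hx
      rw [show negAll (r :: r2 :: rest) = negRow r + negAll (r2 :: rest) from rfl]
      omega

-- ---- binary-search correctness ----
theorem pvBS_eq (dungeon : List (List Int)) (need0 : Int)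
    (hchar : ∀ hp, 1 ≤ hp → (pvFeasible dungeon hp = true ↔ need0 ≤ hp)) :
    ∀ (fuel : Nat) (lo hi : Int), (hi - lo).toNat ≤ fuel → 1 ≤ lo → lo ≤ need0 → need0 ≤ hi →
    pvBSGo dungeon fuel lo hi = need0 := by
  intro fuel
  induction fuel with
  | zero =>
    intro lo hi hf h1 h2 h3
    simp only [pvBSGo]
    omega
  | succ fuel ih =>
    intro lo hi hf h1 h2 h3
    rw [show pvBSGo dungeon (fuel + 1) lo hi
        = if lo < hi then
            (if pvFeasible dungeon (PySem.Int.floordiv (lo + hi) 2) = true then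
              pvBSGo dungeon fuel lo (PySem.Int.floordiv (lo + hi) 2)
            else
              pvBSGo dungeon fuel (PySem.Int.floordiv (lo + hi) 2 + 1) hi)
          else lo from rfl]
    by_cases hlt : lo < hi
    · rw [if_pos hlt]
      have hb := PySem.Int.floordiv_two_mid_bounds (le_of_lt hlt)
      have hmlt : PySem.Int.floordiv (lo + hi) 2 < hi := by
        rw [PySem.Int.floordiv_lt_iff_lt_mul (by norm_num)]
        omega
      have hm1 : 1 ≤ PySem.Int.floordiv (lo + hi) 2 := by omega
      by_cases hfe : pvFeasible dungeon (PySem.Int.floordiv (lo + hi) 2) = true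
      · rw [if_pos hfe]
        exact ih lo _ (by omega) h1 h2 ((hchar _ hm1).mp hfe)
      · rw [if_neg hfe]
        have hnle : ¬ need0 ≤ PySem.Int.floordiv (lo + hi) 2 :=
          fun hc => hfe ((hchar _ hm1).mpr hc)
        exact ih _ hi (by omega) (by omega) (by omega) h3
    · rw [if_neg hlt]
      omega

-- ===== VERDICT (by name: the statement is the Claim_ definition above) =====
theorem calculateMinimumHPDP_spec : Claim_equal_calculateMinimumHPDP := by
  intro dungeon _ hpre
  unfold Spec_calculateMinimumHPDP
  rw [A_eq_need dungeon hpre]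
  obtain ⟨hne, hhead, hrows⟩ := hpre
  have hn : 0 < (dungeon.headD []).length := List.length_pos_iff.mpr hhead
  have hbne : bGo dungeon ≠ [] := bGo_ne_nil dungeon _ hn hne hrows
  have hhd : (bGo dungeon).headD 0 = (bGo dungeon).headD 1 := by
    cases hbg : bGo dungeon with
    | nil => exact absurd hbg hbne
    | cons x t => rfl
  have hneed1 : 1 ≤ (bGo dungeon).headD 0 := by
    rw [hhd]; exact bGo_ge_one dungeon _ (pvHeadD_mem _ 1 hbne)
  have hneedhi : (bGo dungeon).headD 0 ≤ 1 + negAll dungeon := by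
    rw [hhd]; exact bGo_le dungeon _ (pvHeadD_mem _ 1 hbne)
  rw [calculateMinimumHPDP_alt, pvHi_eq, pvBS]
  exact (pvBS_eq dungeon ((bGo dungeon).headD 0)
    (fun hp h1 => feasible_char dungeon ⟨hne, hhead, hrows⟩ hp h1)
    (1 + negAll dungeon - 1).toNat 1 (1 + negAll dungeon) (by omega) (by omega) hneed1 hneedhi).symm
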